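-- pv_equiv track=rewrite | github.com/82surf/problem-solving | programmers/python/두-큐-합-같게-만들기/s1.py | solution
-- ===== SOURCE A (Python) =====
-- from collections import deque
-- from itertools import combinations
--
-- def pop_n_push(q1, q2):
--     rq1, rq2 = q1.copy(), q2.copy()
--     rq2.append(rq1.popleft())
--     return rq1, rq2
--
-- def bfs(q1, q2):
--     q = deque([(q1.copy(), q2.copy(), 0)])
--     while q:
--         nq1, nq2, cnt = q.popleft()
--
--         next1 = pop_n_push(nq1, nq2)
--         if sum(next1[0]) == sum(next1[1]):
--             return cnt + 1
--
--         next2 = pop_n_push(nq2, nq1)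
--         if sum(next2[0]) == sum(next2[1]):
--             return cnt + 1
--
--         q.append([next1[0], next1[1], cnt + 1])
--         q.append([next2[0], next2[1], cnt + 1])
--
-- def solution(queue1, queue2):
--     # 두 큐의 합이 같을 수 있다면 BFS
--     nums = queue1 + queue2
--     half = sum(nums) // 2
--     q1, q2 = deque(queue1), deque(queue2)
--     for c in combinations(nums, len(queue1)):
--         if sum(c) == half:
--             return bfs(q1, q2)
--     else:
--         return -1
--     return answer
-- ===== SOURCE B (Python) =====
-- def solution(queue1, queue2):
--     # Brute-force over the reachable "window" states of the circular sequence: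
--     # after a pops from queue1 and b pops from queue2 (a, b >= 0), queue1 is the
--     # circular window arr[a : len(queue1)+b] and the cost is a + b.
--     total = sum(queue1) + sum(queue2)
--     if total % 2 != 0:
--         return -1
--     half = total // 2
--     arr = queue1 + queue2
--     n = len(arr)
--     n1 = len(queue1)
--     ext = arr + arr + arr
--     best = -1
--     for a in range(2 * n):
--         s = 0
--         for L in range(n + 1):
--             if L > 0:
--                 s = s + ext[a + L - 1]
--             if a + L >= n1 and s == half:
--                 cost = 2 * a + L - n1
--                 if best == -1 or cost < best:
--                     best = cost
--     return best
-- ===== Notes on version B (the rewrite author's own statement) =====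
-- stated objective: alternative
-- what changed: A filters feasibility with itertools.combinations (O(C(n,k))) and then runs an exponential BFS over whole queue states; B instead scans the reachable circular-window states of queue1+queue2 directly with a running sum, a quadratic double loop over (start, length).
-- intended difference: When the two sums are already equal A returns the length of the shortest non-empty re-equalizing move sequence instead of 0, and when a solution exists but no len(queue1)-element subset of queue1+queue2 sums to half the total A's wrong feasibility pre-check makes it return -1; B returns the intended minimal number of operations in both cases. — e.g. on solution([5, 1, 1], [5]): A returns -1, B returns 3
-- outside the precondition, e.g. on solution([0], []): A returns 1, B returns 0
import Mathlib
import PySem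

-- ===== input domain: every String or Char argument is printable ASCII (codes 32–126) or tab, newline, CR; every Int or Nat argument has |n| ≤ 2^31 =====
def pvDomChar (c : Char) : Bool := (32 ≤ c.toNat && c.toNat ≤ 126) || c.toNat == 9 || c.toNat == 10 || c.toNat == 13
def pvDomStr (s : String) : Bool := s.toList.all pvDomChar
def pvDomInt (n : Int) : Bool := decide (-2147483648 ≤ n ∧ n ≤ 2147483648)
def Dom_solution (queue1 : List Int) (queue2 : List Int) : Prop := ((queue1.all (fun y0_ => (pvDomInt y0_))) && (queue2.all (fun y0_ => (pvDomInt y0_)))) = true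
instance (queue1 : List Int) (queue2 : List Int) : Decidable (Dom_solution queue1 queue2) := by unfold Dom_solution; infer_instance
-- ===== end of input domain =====

-- B replaces A's combinations pre-check + exponential BFS by a quadratic scan of the reachable
-- circular-window states with a running sum; on the D_solution corner A's value is wrong and B
-- returns the intended minimal operation count.  Equivalence is about return values only.

-- ===== PORT A =====
-- itertools.combinations(nums, k), in itertools order
def combinationsA : Nat → List Int → List (List Int)
  | 0, _ => [[]]
  | _ + 1, [] => []
  | k + 1, x :: xs => (combinationsA k xs).map (fun c => x :: c) ++ combinationsA (k + 1) xs

-- bfs(q1, q2): the while-loop over the work queue; fuel is only a totality device (the 0 results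
-- sit where Python raises IndexError or falls off the loop, both only reachable outside
-- Pre_solution, and the proofs show the fuel below is never exhausted inside Pre_solution).
def bfsA : Nat → List (List Int × List Int × Int) → Int
  | 0, _ => 0
  | _ + 1, [] => 0
  | fuel + 1, (nq1, nq2, cnt) :: rest =>
    match nq1 with
    | [] => 0
    | x :: q1' =>
      let next1 : List Int × List Int := (q1', nq2 ++ [x])
      if next1.1.sum = next1.2.sum then cnt + 1
      else
        match nq2 with
        | [] => 0
        | y :: q2' =>
          let next2 : List Int × List Int := (q2', nq1 ++ [y])
          if next2.1.sum = next2.2.sum then cnt + 1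
          else bfsA fuel (rest ++ [(next1.1, next1.2, cnt + 1), (next2.1, next2.2, cnt + 1)])

-- the 'for c in combinations(nums, len(queue1))' loop of A
def solutionGo (q1 q2 : List Int) (half : Int) (fuel : Nat) : List (List Int) → Int
  | [] => -1
  | c :: cs => if c.sum = half then bfsA fuel [(q1, q2, 0)] else solutionGo q1 q2 half fuel cs

def solution (queue1 : List Int) (queue2 : List Int) : Int :=
  let nums := queue1 ++ queue2
  let half := PySem.Int.floordiv nums.sum 2
  solutionGo queue1 queue2 half (2 ^ (queue1.length + 1)) (combinationsA queue1.length nums)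

-- ===== PORT B =====
-- the running-sum update of B's inner loop:  s = s + ext[a+L-1] for L > 0 (index always in range here, so getD is exact)
def altS (ext : List Int) (a : Nat) (s : Int) (L : Nat) : Int :=
  if 0 < L then s + ext.getD (a + L - 1) 0 else s

-- cost = 2*a + L - n1
def altCost (n1 a L : Nat) : Int := 2 * (a : Int) + (L : Int) - (n1 : Int)

-- one step of B's inner loop; st = (best, s)
def altStep (ext : List Int) (half : Int) (n1 a : Nat) (st : Int × Int) (L : Nat) : Int × Int :=
  if n1 ≤ a + L ∧ altS ext a st.2 L = half then
    (if st.1 = -1 ∨ altCost n1 a L < st.1 then altCost n1 a L else st.1, altS ext a st.2 L)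
  else (st.1, altS ext a st.2 L)

-- B's inner 'for L in range(n+1)' loop (called with k = n)
def altInner (ext : List Int) (half : Int) (n1 a k : Nat) (best : Int) : Int :=
  ((List.range (k + 1)).foldl (altStep ext half n1 a) (best, 0)).1

-- B's outer 'for a in range(2*n)' loop (called with m = 2*n)
def altOuter (ext : List Int) (half : Int) (n1 k m : Nat) : Int :=
  (List.range m).foldl (fun best a => altInner ext half n1 a k best) (-1)

def solution_alt (queue1 : List Int) (queue2 : List Int) : Int :=
  if PySem.Int.mod (queue1.sum + queue2.sum) 2 ≠ 0 then -1
  else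
    altOuter ((queue1 ++ queue2) ++ (queue1 ++ queue2) ++ (queue1 ++ queue2))
      (PySem.Int.floordiv (queue1.sum + queue2.sum) 2)
      queue1.length ((queue1 ++ queue2).length) (2 * (queue1 ++ queue2).length)

-- ===== PRECONDITION & SPEC =====
-- cost of reaching the circular-window state that starts at a and has length L (a+b moves, b = a+L-n1)
def costW (n1 a L : Nat) : Int := 2 * (a : Int) + (L : Int) - (n1 : Int)
-- sum of the circular window of queue1+queue2 starting at a with length L
def winR (queue1 queue2 : List Int) (a L : Nat) : Int :=
  (((queue1 ++ queue2).rotate a).take L).sum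
-- a reachable equalizing window state
def hitW (queue1 queue2 : List Int) (a L : Nat) : Prop :=
  queue1.length ≤ a + L ∧ 2 * winR queue1 queue2 a L = (queue1 ++ queue2).sum
-- A's feasibility pre-check succeeds
def feasW (queue1 queue2 : List Int) : Prop :=
  ∃ c ∈ (queue1 ++ queue2).sublists, c.length = queue1.length ∧
    c.sum = PySem.Int.floordiv (queue1 ++ queue2).sum 2

-- Pre_solution keeps the inputs where A's feasibility check fails (A returns -1) or where the
-- minimal positive cost d of an equalizing window state satisfies d ≤ len(queue1) and
-- d ≤ len(queue2)+1: there A's BFS returns d before dequeuing a state with an emptied queue.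
-- On the excluded inputs A raises IndexError (popleft of an emptied deque), except the single
-- input ([0], []) (cited in the claim), on which A returns 1 while B returns 0.
def Pre_solution (queue1 : List Int) (queue2 : List Int) : Prop :=
  (¬ feasW queue1 queue2) ∨
  (∃ a < (queue1 ++ queue2).length, ∃ L ≤ (queue1 ++ queue2).length,
     hitW queue1 queue2 a L ∧ 1 ≤ costW queue1.length a L ∧
     costW queue1.length a L ≤ (queue1.length : Int) ∧
     costW queue1.length a L ≤ (queue2.length : Int) + 1 ∧
     ∀ a' < (queue1 ++ queue2).length, ∀ L' ≤ (queue1 ++ queue2).length,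
       hitW queue1 queue2 a' L' → 1 ≤ costW queue1.length a' L' →
       costW queue1.length a L ≤ costW queue1.length a' L')
instance (queue1 : List Int) (queue2 : List Int) : Decidable (Pre_solution queue1 queue2) := by
  unfold Pre_solution feasW hitW winR costW; infer_instance

def pvWitness_solution : List Int × List Int := ([1], [])

-- On inputs (inside Pre_) where the two sums are already equal A returns the length of the
-- shortest non-empty re-equalizing move sequence instead of the intended 0, and on inputs where
-- an equalizing window state exists but A's wrong feasibility pre-check (subsets of exactly
-- len(queue1) elements) fails A returns -1 instead of the minimal operation count; B returns the
-- intended value in both cases.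
def D_solution (queue1 : List Int) (queue2 : List Int) : Prop :=
  queue1.sum = queue2.sum ∨
  ((¬ feasW queue1 queue2) ∧ ∃ a < (queue1 ++ queue2).length,
      ∃ L ≤ (queue1 ++ queue2).length, 2 * winR queue1 queue2 a L = (queue1 ++ queue2).sum)
instance (queue1 : List Int) (queue2 : List Int) : Decidable (D_solution queue1 queue2) := by
  unfold D_solution feasW winR; infer_instance

def Spec_solution (queue1 : List Int) (queue2 : List Int) (out : Int) : Prop :=
  ¬ D_solution queue1 queue2 → out = solution_alt queue1 queue2
instance (queue1 : List Int) (queue2 : List Int) (out : Int) : Decidable (Spec_solution queue1 queue2 out) := by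
  unfold Spec_solution; infer_instance

def pvDiffWitness_solution : List Int × List Int := ([5, 1, 1], [5])
def pvDiffWitnessOut_solution : Int × Int := (-1, 3)

-- ===== CLAIM (what is proved, stated in full; the proofs are below) =====
def Claim_unchanged_solution : Prop := ∀ (queue1 : List Int) (queue2 : List Int), Dom_solution queue1 queue2 → Pre_solution queue1 queue2 → Spec_solution queue1 queue2 (solution queue1 queue2)
def Claim_changed_solution : Prop := Dom_solution (pvDiffWitness_solution.1) (pvDiffWitness_solution.2) ∧ Pre_solution (pvDiffWitness_solution.1) (pvDiffWitness_solution.2) ∧ D_solution (pvDiffWitness_solution.1) (pvDiffWitness_solution.2) ∧ solution (pvDiffWitness_solution.1) (pvDiffWitness_solution.2) = pvDiffWitnessOut_solution.1 ∧ solution_alt (pvDiffWitness_solution.1) (pvDiffWitness_solution.2) = pvDiffWitnessOut_solution.2 ∧ pvDiffWitnessOut_solution.1 ≠ pvDiffWitnessOut_solution.2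
def Claim_exact_solution : Prop := ∀ (queue1 : List Int) (queue2 : List Int), Dom_solution queue1 queue2 → Pre_solution queue1 queue2 → D_solution queue1 queue2 → solution queue1 queue2 ≠ solution_alt queue1 queue2

-- ===== LEMMAS AND PROOFS =====
-- proof-side: the window as a drop/take of the doubled list, and its bridge to winR
def winS (queue1 queue2 : List Int) (a L : Nat) : Int :=
  ((((queue1 ++ queue2) ++ (queue1 ++ queue2)).drop a).take L).sum

theorem winR_eq_winS (queue1 queue2 : List Int) (a L : Nat)
    (ha : a < (queue1 ++ queue2).length) (hL : L ≤ (queue1 ++ queue2).length) :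
    winR queue1 queue2 a L = winS queue1 queue2 a L := by
  unfold winR winS
  congr 1
  conv_lhs => rw [List.rotate_eq_drop_append_take (by omega : a ≤ (queue1 ++ queue2).length),
    List.take_append]
  conv_rhs => rw [List.drop_append_of_le_length (by omega : a ≤ (queue1 ++ queue2).length),
    List.take_append]
  congr 1
  rw [List.take_take]
  congr 1
  rw [List.length_drop]
  omega

theorem winR_zero (queue1 queue2 : List Int) :
    winR queue1 queue2 0 queue1.length = queue1.sum := by
  unfold winR
  rw [List.rotate_zero, List.take_append]
  simp

-- ---- A: combinations ----
theorem combinationsA_mem : ∀ (xs : List Int) (k : Nat) (c : List Int),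
    c ∈ combinationsA k xs → c.Sublist xs ∧ c.length = k := by
  intro xs
  induction xs with
  | nil =>
    intro k c hc
    cases k with
    | zero => simp [combinationsA] at hc; subst hc; simp
    | succ k => simp [combinationsA] at hc
  | cons x xs ih =>
    intro k c hc
    cases k with
    | zero => simp [combinationsA] at hc; subst hc; simp
    | succ k =>
      simp only [combinationsA, List.mem_append, List.mem_map] at hc
      rcases hc with ⟨c', hc', rfl⟩ | hc
      · obtain ⟨hs, hl⟩ := ih k c' hc'
        exact ⟨List.Sublist.cons₂ x hs, by simp [hl]⟩
      · obtain ⟨hs, hl⟩ := ih (k + 1) c hc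
        exact ⟨List.Sublist.cons x hs, hl⟩

theorem combinationsA_complete : ∀ (xs : List Int) (c : List Int), c.Sublist xs →
    c ∈ combinationsA c.length xs := by
  intro xs
  induction xs with
  | nil => intro c hc; simp [List.sublist_nil.mp hc, combinationsA]
  | cons x xs ih =>
    intro c hc
    cases hc with
    | cons h =>
      rename_i h
      revert h
      rcases c with _ | ⟨y, c1⟩ <;> intro h
      · simp [combinationsA]
      · simp only [combinationsA, List.length_cons, List.mem_append]
        right
        simpa using ih _ h
    | cons₂ h =>
      rename_i h
      simp only [List.length_cons, combinationsA, List.mem_append, List.mem_map]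
      exact Or.inl ⟨_, ih _ h, rfl⟩

theorem solutionGo_none (q1 q2 : List Int) (half : Int) (fuel : Nat) :
    ∀ l : List (List Int), (∀ c ∈ l, c.sum ≠ half) → solutionGo q1 q2 half fuel l = -1 := by
  intro l
  induction l with
  | nil => intro _; rfl
  | cons c cs ih =>
    intro h
    simp only [solutionGo]
    rw [if_neg (by simpa using h c (by simp))]
    exact ih (fun c' hc' => h c' (by simp [hc']))

theorem solutionGo_hit (q1 q2 : List Int) (half : Int) (fuel : Nat) :
    ∀ l : List (List Int), (∃ c ∈ l, c.sum = half) →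
      solutionGo q1 q2 half fuel l = bfsA fuel [(q1, q2, 0)] := by
  intro l
  induction l with
  | nil => rintro ⟨c, hc, _⟩; simp at hc
  | cons c cs ih =>
    rintro ⟨c', hc', hs⟩
    simp only [solutionGo]
    by_cases h : c.sum = half
    · rw [if_pos h]
    · rw [if_neg h]
      rcases List.mem_cons.mp hc' with rfl | hmem
      · exact absurd hs h
      · exact ih ⟨c', hmem, hs⟩

-- A returns -1 when the feasibility check fails
theorem solution_eq_neg_one (queue1 queue2 : List Int) (hpre : ¬ feasW queue1 queue2) :
    solution queue1 queue2 = -1 := by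
  unfold solution
  apply solutionGo_none
  intro c hc
  obtain ⟨hs, hl⟩ := combinationsA_mem _ _ _ hc
  intro hsum
  exact hpre ⟨c, List.mem_sublists.2 hs, hl, hsum⟩

-- ---- B: the double loop computes a running minimum over the hit costs ----
def minUpd (b c : Int) : Int := if b = -1 ∨ c < b then c else b

def hitsRow (ext : List Int) (half : Int) (n1 a k : Nat) : List Int :=
  (List.range (k + 1)).filterMap
    (fun L => if n1 ≤ a + L ∧ ((ext.drop a).take L).sum = half then some (altCost n1 a L) else none)

def allHits (ext : List Int) (half : Int) (n1 k m : Nat) : List Int :=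
  (List.range m).flatMap (fun a => hitsRow ext half n1 a k)

theorem altS_zero (ext : List Int) (a : Nat) (s : Int) : altS ext a s 0 = s := by
  simp [altS]

theorem altS_succ (ext : List Int) (a : Nat) (s : Int) (k : Nat) :
    altS ext a s (k + 1) = s + ext.getD (a + k) 0 := by
  unfold altS
  rw [if_pos (Nat.succ_pos k)]
  have h : a + (k + 1) - 1 = a + k := by omega
  rw [h]

theorem window_sum_succ (l : List Int) (a k : Nat) :
    ((l.drop a).take (k + 1)).sum = ((l.drop a).take k).sum + l.getD (a + k) 0 := by
  rw [List.take_add_one, List.sum_append]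
  congr 1
  rw [List.getD_eq_getElem?_getD, ← List.getElem?_drop]
  cases h : (l.drop a)[k]? <;> simp

theorem altStep_eq (ext : List Int) (half : Int) (n1 a : Nat) (st : Int × Int) (L : Nat) :
    altStep ext half n1 a st L =
      ((if n1 ≤ a + L ∧ altS ext a st.2 L = half then minUpd st.1 (altCost n1 a L) else st.1),
        altS ext a st.2 L) := by
  unfold altStep minUpd
  split_ifs <;> rfl

theorem altStep_snd (ext : List Int) (half : Int) (n1 a : Nat) (st : Int × Int) (L : Nat) :
    (altStep ext half n1 a st L).2 = altS ext a st.2 L := by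
  unfold altStep; split_ifs <;> rfl

theorem inner_snd (ext : List Int) (half : Int) (n1 a : Nat) : ∀ (k : Nat) (b : Int),
    (((List.range (k + 1)).foldl (altStep ext half n1 a) (b, 0)).2) = ((ext.drop a).take k).sum := by
  intro k
  induction k with
  | zero =>
    intro b
    simp [List.range_succ, altStep_snd, altS_zero]
  | succ k ih =>
    intro b
    rw [List.range_succ, List.foldl_append]
    simp only [List.foldl_cons, List.foldl_nil]
    rw [altStep_snd, altS_succ, ih b, window_sum_succ]

theorem inner_eq_fold (ext : List Int) (half : Int) (n1 a : Nat) : ∀ (k : Nat) (b : Int),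
    altInner ext half n1 a k b = (hitsRow ext half n1 a k).foldl minUpd b := by
  intro k
  induction k with
  | zero =>
    intro b
    unfold altInner hitsRow
    simp only [List.range_succ, List.range_zero, List.nil_append, List.foldl_cons, List.foldl_nil,
      List.filterMap_cons, List.filterMap_nil]
    unfold altStep
    rw [altS_zero]
    have h0 : ((ext.drop a).take 0).sum = 0 := by simp
    by_cases h : n1 ≤ a + 0 ∧ (0 : Int) = half
    · rw [if_pos h]
      have : (if n1 ≤ a + 0 ∧ ((ext.drop a).take 0).sum = half then some (altCost n1 a 0) else none)
          = some (altCost n1 a 0) := by rw [if_pos (by simpa [h0] using h)]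
      rw [this]
      simp [minUpd]
    · rw [if_neg h]
      have : (if n1 ≤ a + 0 ∧ ((ext.drop a).take 0).sum = half then some (altCost n1 a 0) else none)
          = none := by rw [if_neg (by simpa [h0] using h)]
      rw [this]
      simp
  | succ k ih =>
    intro b
    unfold altInner
    rw [List.range_succ, List.foldl_append]
    simp only [List.foldl_cons, List.foldl_nil]
    have hsnd := inner_snd ext half n1 a k b
    have hfst : (((List.range (k + 1)).foldl (altStep ext half n1 a) (b, 0)).1)
        = (hitsRow ext half n1 a k).foldl minUpd b := ih b
    have hrow : hitsRow ext half n1 a (k + 1) = hitsRow ext half n1 a k ++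
        (if n1 ≤ a + (k + 1) ∧ ((ext.drop a).take (k + 1)).sum = half
          then [altCost n1 a (k + 1)] else []) := by
      unfold hitsRow
      rw [List.range_succ, List.filterMap_append]
      congr 1
      split_ifs with h
      · simp [h]
      · simp [h]
    rw [hrow, List.foldl_append, altStep_eq, altS_succ, hsnd, ← window_sum_succ, hfst]
    split_ifs with h
    · simp
    · simp

theorem outer_eq_fold (ext : List Int) (half : Int) (n1 k : Nat) : ∀ (m : Nat),
    altOuter ext half n1 k m = (allHits ext half n1 k m).foldl minUpd (-1) := by
  intro m
  induction m with
  | zero => rfl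
  | succ m ih =>
    unfold altOuter allHits at *
    rw [List.range_succ, List.foldl_append, List.flatMap_append, List.foldl_append, ← ih]
    simp only [List.foldl_cons, List.foldl_nil, List.flatMap_cons, List.flatMap_nil,
      List.append_nil]
    exact inner_eq_fold ext half n1 m k _


theorem altCost_nonneg (n1 a L : Nat) (h : n1 ≤ a + L) : 0 ≤ altCost n1 a L := by
  unfold altCost
  have : (n1 : Int) ≤ (a : Int) + (L : Int) := by exact_mod_cast h
  omega

theorem fold_minUpd_go : ∀ (l : List Int) (b : Int), 0 ≤ b → (∀ c ∈ l, 0 ≤ c) →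
    l.foldl minUpd b ≤ b ∧ (l.foldl minUpd b = b ∨ l.foldl minUpd b ∈ l) ∧
      ∀ c ∈ l, l.foldl minUpd b ≤ c := by
  intro l
  induction l with
  | nil => intro b hb _; exact ⟨le_refl _, Or.inl rfl, by simp⟩
  | cons c t ih =>
    intro b hb hpos
    have hc : 0 ≤ c := hpos c (by simp)
    have hb' : 0 ≤ minUpd b c := by unfold minUpd; split_ifs <;> omega
    obtain ⟨h1, h2, h3⟩ := ih (minUpd b c) hb' (fun x hx => hpos x (by simp [hx]))
    have hmin_le_b : minUpd b c ≤ b := by unfold minUpd; split_ifs <;> omega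
    have hmin_le_c : minUpd b c ≤ c := by unfold minUpd; split_ifs <;> omega
    refine ⟨by simpa using le_trans h1 hmin_le_b, ?_, ?_⟩
    · rcases h2 with h2 | h2
      · by_cases hbc : minUpd b c = b
        · simp only [List.foldl_cons]
          rw [h2, hbc]
          exact Or.inl rfl
        · have : minUpd b c = c := by unfold minUpd at *; split_ifs at * <;> omega
          simp only [List.foldl_cons]
          rw [h2, this]
          exact Or.inr (by simp)
      · exact Or.inr (by simp [h2])
    · intro x hx
      rcases List.mem_cons.mp hx with rfl | hx
      · exact le_trans h1 hmin_le_c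
      · exact h3 x hx

theorem fold_minUpd_spec (l : List Int) (hpos : ∀ c ∈ l, 0 ≤ c) :
    (l.foldl minUpd (-1) = -1 ∧ l = []) ∨
      (l.foldl minUpd (-1) ∈ l ∧ ∀ c ∈ l, l.foldl minUpd (-1) ≤ c) := by
  cases l with
  | nil => exact Or.inl ⟨rfl, rfl⟩
  | cons c t =>
    right
    have hstep : minUpd (-1) c = c := by unfold minUpd; rw [if_pos (Or.inl rfl)]
    have hc : 0 ≤ c := hpos c (by simp)
    obtain ⟨h1, h2, h3⟩ := fold_minUpd_go t c hc (fun x hx => hpos x (by simp [hx]))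
    simp only [List.foldl_cons, hstep]
    constructor
    · rcases h2 with h2 | h2
      · rw [h2]; simp
      · simp [h2]
    · intro x hx
      rcases List.mem_cons.mp hx with rfl | hx
      · exact h1
      · exact h3 x hx

theorem mem_hitsRow (ext : List Int) (half : Int) (n1 a k : Nat) (v : Int) :
    v ∈ hitsRow ext half n1 a k ↔
      ∃ L ≤ k, (n1 ≤ a + L ∧ ((ext.drop a).take L).sum = half) ∧ v = altCost n1 a L := by
  unfold hitsRow
  simp only [List.mem_filterMap, List.mem_range, Nat.lt_succ_iff]
  constructor
  · rintro ⟨L, hL, hv⟩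
    by_cases h : n1 ≤ a + L ∧ ((ext.drop a).take L).sum = half
    · rw [if_pos h] at hv
      exact ⟨L, hL, h, (Option.some_inj.mp hv).symm⟩
    · rw [if_neg h] at hv; simp at hv
  · rintro ⟨L, hL, h, rfl⟩
    exact ⟨L, hL, by rw [if_pos h]⟩

theorem mem_allHits (ext : List Int) (half : Int) (n1 k m : Nat) (v : Int) :
    v ∈ allHits ext half n1 k m ↔
      ∃ a < m, ∃ L ≤ k, (n1 ≤ a + L ∧ ((ext.drop a).take L).sum = half) ∧ v = altCost n1 a L := by
  unfold allHits
  simp only [List.mem_flatMap, List.mem_range]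
  constructor
  · rintro ⟨a, ha, hv⟩
    exact ⟨a, ha, (mem_hitsRow _ _ _ _ _ _).mp hv⟩
  · rintro ⟨a, ha, h⟩
    exact ⟨a, ha, (mem_hitsRow _ _ _ _ _ _).mpr h⟩

theorem allHits_nonneg (ext : List Int) (half : Int) (n1 k m : Nat) :
    ∀ v ∈ allHits ext half n1 k m, 0 ≤ v := by
  intro v hv
  obtain ⟨a, _, L, _, ⟨hge, _⟩, rfl⟩ := (mem_allHits _ _ _ _ _ _).mp hv
  exact altCost_nonneg n1 a L hge

-- windows of arr ++ arr ++ arr restricted to the doubled list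
theorem ext_window_lo (arr : List Int) (a L : Nat) (h : a + L ≤ 2 * arr.length) :
    ((arr ++ arr ++ arr).drop a).take L = ((arr ++ arr).drop a).take L := by
  have ha : a ≤ (arr ++ arr).length := by simp; omega
  rw [List.drop_append_of_le_length ha, List.take_append_of_le_length]
  simp
  omega

theorem ext_window_hi (arr : List Int) (a : Nat) :
    (arr ++ arr ++ arr).drop (arr.length + a) = (arr ++ arr).drop a := by
  rw [List.append_assoc]
  exact List.drop_length_add_append a

-- evenness bridges
theorem even_of_hit (t v : Int) (h : 2 * v = t) : PySem.Int.mod t 2 = 0 := by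
  rw [PySem.Int.mod_eq_zero_iff_dvd]
  exact ⟨v, by omega⟩

theorem total_eq_two_half (t : Int) (h : PySem.Int.mod t 2 = 0) :
    t = 2 * PySem.Int.floordiv t 2 := by
  have := PySem.Int.floordiv_mul_add_mod t 2
  omega

-- B's value: the fold over all hit costs, when the total is even
theorem solution_alt_eq_fold (queue1 queue2 : List Int)
    (h : PySem.Int.mod (queue1.sum + queue2.sum) 2 = 0) :
    solution_alt queue1 queue2 =
      (allHits ((queue1 ++ queue2) ++ (queue1 ++ queue2) ++ (queue1 ++ queue2))
        (PySem.Int.floordiv (queue1.sum + queue2.sum) 2) queue1.length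
        ((queue1 ++ queue2).length) (2 * (queue1 ++ queue2).length)).foldl minUpd (-1) := by
  unfold solution_alt
  rw [if_neg (by simpa using h)]
  exact outer_eq_fold _ _ _ _ _

-- ---- A: the BFS over move-sequence levels ----
def child1 (s : List Int × List Int) : List Int × List Int :=
  match s with
  | (x :: w, r) => (w, r ++ [x])
  | ([], r) => ([], r)

def child2 (s : List Int × List Int) : List Int × List Int :=
  match s with
  | (w, y :: r) => (r, w ++ [y])
  | (w, []) => (w, [])

def levelL (q1 q2 : List Int) : Nat → List (List Int × List Int)
  | 0 => [(q1, q2)]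
  | c + 1 => (levelL q1 q2 c).flatMap (fun s => [child1 s, child2 s])

theorem bfsA_step (f : Nat) (w r : List Int) (c : Int) (rest : List (List Int × List Int × Int))
    (h1 : w ≠ []) (h2 : r ≠ [])
    (g1 : ¬ ((child1 (w, r)).1.sum = (child1 (w, r)).2.sum))
    (g2 : ¬ ((child2 (w, r)).1.sum = (child2 (w, r)).2.sum)) :
    bfsA (f + 1) ((w, r, c) :: rest) =
      bfsA f (rest ++ [((child1 (w, r)).1, (child1 (w, r)).2, c + 1),
                       ((child2 (w, r)).1, (child2 (w, r)).2, c + 1)]) := by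
  rcases w with _ | ⟨x, w'⟩
  · exact absurd rfl h1
  rcases r with _ | ⟨y, r'⟩
  · exact absurd rfl h2
  have e1 : child1 (x :: w', y :: r') = (w', (y :: r') ++ [x]) := rfl
  have e2 : child2 (x :: w', y :: r') = (r', (x :: w') ++ [y]) := rfl
  rw [e1] at g1
  rw [e2] at g2
  rw [e1, e2]
  simp only [bfsA]
  rw [if_neg (by simpa using g1), if_neg (by simpa using g2)]

theorem bfsA_find1 (f : Nat) (w r : List Int) (c : Int) (rest : List (List Int × List Int × Int))
    (h1 : w ≠ []) (g1 : (child1 (w, r)).1.sum = (child1 (w, r)).2.sum) :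
    bfsA (f + 1) ((w, r, c) :: rest) = c + 1 := by
  rcases w with _ | ⟨x, w'⟩
  · exact absurd rfl h1
  have e1 : child1 (x :: w', r) = (w', r ++ [x]) := rfl
  rw [e1] at g1
  simp only [bfsA]
  rw [if_pos (by simpa using g1)]

theorem bfsA_find2 (f : Nat) (w r : List Int) (c : Int) (rest : List (List Int × List Int × Int))
    (h1 : w ≠ []) (g1 : ¬ ((child1 (w, r)).1.sum = (child1 (w, r)).2.sum))
    (h2 : r ≠ []) (g2 : (child2 (w, r)).1.sum = (child2 (w, r)).2.sum) :
    bfsA (f + 1) ((w, r, c) :: rest) = c + 1 := by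
  rcases w with _ | ⟨x, w'⟩
  · exact absurd rfl h1
  rcases r with _ | ⟨y, r'⟩
  · exact absurd rfl h2
  have e1 : child1 (x :: w', y :: r') = (w', (y :: r') ++ [x]) := rfl
  have e2 : child2 (x :: w', y :: r') = (r', (x :: w') ++ [y]) := rfl
  rw [e1] at g1
  rw [e2] at g2
  simp only [bfsA]
  rw [if_neg (by simpa using g1), if_pos (by simpa using g2)]

def okNF (s : List Int × List Int) : Prop :=
  s.1 ≠ [] ∧ s.2 ≠ [] ∧ ¬ ((child1 s).1.sum = (child1 s).2.sum) ∧
    ¬ ((child2 s).1.sum = (child2 s).2.sum)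

theorem bfsA_level (c : Int) : ∀ (l : List (List Int × List Int))
    (rest : List (List Int × List Int × Int)) (f : Nat),
    (∀ s ∈ l, okNF s) →
    bfsA (l.length + f) (l.map (fun s => (s.1, s.2, c)) ++ rest)
      = bfsA f (rest ++ (l.flatMap (fun s => [child1 s, child2 s])).map
          (fun s => (s.1, s.2, c + 1))) := by
  intro l
  induction l with
  | nil => intro rest f _; simp
  | cons s t ih =>
    intro rest f h
    obtain ⟨h1, h2, g1, g2⟩ := h s (by simp)
    have hl : (s :: t).length + f = (t.length + f) + 1 := by simp; omega
    rw [hl]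
    simp only [List.map_cons, List.cons_append]
    have hstep := bfsA_step (t.length + f) s.1 s.2 c
      (t.map (fun s => (s.1, s.2, c)) ++ rest) h1 h2 g1 g2
    rw [hstep]
    rw [List.append_assoc]
    rw [ih (rest ++ [((child1 s).1, (child1 s).2, c + 1), ((child2 s).1, (child2 s).2, c + 1)]) f
      (fun x hx => h x (by simp [hx]))]
    congr 1
    simp [List.flatMap_cons]

theorem bfsA_findLevel (c : Int) : ∀ (p : List (List Int × List Int))
    (s : List Int × List Int) (t : List (List Int × List Int))
    (rest : List (List Int × List Int × Int)) (f : Nat),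
    (∀ x ∈ p, okNF x) → s.1 ≠ [] →
    ((child1 s).1.sum = (child1 s).2.sum ∨
      (¬ ((child1 s).1.sum = (child1 s).2.sum) ∧ s.2 ≠ [] ∧
        (child2 s).1.sum = (child2 s).2.sum)) →
    bfsA ((p.length + 1) + f) ((p ++ s :: t).map (fun x => (x.1, x.2, c)) ++ rest) = c + 1 := by
  intro p
  induction p with
  | nil =>
    intro s t rest f _ h1 hfind
    rw [show (([] : List (List Int × List Int)).length + 1) + f = f + 1 by simp; omega]
    simp only [List.nil_append, List.map_cons, List.cons_append]
    rcases hfind with hg | ⟨hn, h2, hg⟩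
    · exact bfsA_find1 f s.1 s.2 c _ h1 hg
    · exact bfsA_find2 f s.1 s.2 c _ h1 hn h2 hg
  | cons x p ih =>
    intro s t rest f h h1 hfind
    obtain ⟨hx1, hx2, hg1, hg2⟩ := h x (by simp)
    rw [show ((x :: p).length + 1) + f = ((p.length + 1) + f) + 1 by simp; omega]
    simp only [List.cons_append, List.map_cons]
    have hstep := bfsA_step ((p.length + 1) + f) x.1 x.2 c
      ((p ++ s :: t).map (fun x => (x.1, x.2, c)) ++ rest) hx1 hx2 hg1 hg2
    rw [hstep, List.append_assoc]
    exact ih s t _ f (fun y hy => h y (by simp [hy])) h1 hfind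

theorem flatMap_two_length (l : List (List Int × List Int)) :
    (l.flatMap (fun s => [child1 s, child2 s])).length = 2 * l.length := by
  induction l with
  | nil => simp
  | cons s t ih => simp [List.flatMap_cons, ih]; omega

theorem levelL_length (q1 q2 : List Int) : ∀ c, (levelL q1 q2 c).length = 2 ^ c := by
  intro c
  induction c with
  | zero => rfl
  | succ c ih => rw [levelL, flatMap_two_length, ih, pow_succ]; omega

theorem bfsA_run (q1 q2 : List Int) : ∀ (C : Nat) (f : Nat),
    (∀ c < C, ∀ s ∈ levelL q1 q2 c, okNF s) →
    bfsA ((2 ^ C - 1) + f) [(q1, q2, (0 : Int))] =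
      bfsA f ((levelL q1 q2 C).map (fun s => (s.1, s.2, (C : Int)))) := by
  intro C
  induction C with
  | zero => intro f _; simp [levelL]
  | succ C ih =>
    intro f h
    have hpos : 1 ≤ 2 ^ C := Nat.one_le_two_pow
    have hfuel : 2 ^ (C + 1) - 1 + f = (2 ^ C - 1) + (2 ^ C + f) := by
      rw [pow_succ]; omega
    rw [hfuel, ih (2 ^ C + f) (fun c hc => h c (Nat.lt_succ_of_lt hc))]
    have hlvl := bfsA_level (C : Int) (levelL q1 q2 C) [] f (h C (Nat.lt_succ_self C))
    rw [levelL_length] at hlvl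
    rw [List.append_nil] at hlvl
    rw [hlvl, List.nil_append]
    have : ((C : Int) + 1) = ((C + 1 : Nat) : Int) := by push_cast; ring
    rw [this]
    rfl

-- ---- circular windows ----
def pcF (q1 q2 : List Int) (k : Nat) : Int := (((q1 ++ q2) ++ (q1 ++ q2)).take k).sum

def winL (q1 q2 : List Int) (i L : Nat) : List Int :=
  (((q1 ++ q2) ++ (q1 ++ q2)).drop (i % (q1 ++ q2).length)).take L

def stE (q1 q2 : List Int) (i j : Nat) : List Int × List Int :=
  (winL q1 q2 i (j - i), winL q1 q2 j ((i + (q1 ++ q2).length) - j))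

def stA (q1 q2 : List Int) (p q : Nat) : List Int × List Int :=
  stE q1 q2 p (q1.length + q)

def stB (q1 q2 : List Int) (p q : Nat) : List Int × List Int :=
  stE q1 q2 (q1.length + q) (p + (q1 ++ q2).length)

def hitP (q1 q2 : List Int) (p q : Nat) : Prop :=
  2 * (winL q1 q2 p (q1.length + q - p)).sum = (q1 ++ q2).sum

theorem len2 (q1 q2 : List Int) :
    ((q1 ++ q2) ++ (q1 ++ q2)).length = (q1 ++ q2).length + (q1 ++ q2).length := by
  rw [List.length_append]

theorem pc_take_add (q1 q2 : List Int) (a L : Nat) :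
    ((((q1 ++ q2) ++ (q1 ++ q2)).drop a).take L).sum = pcF q1 q2 (a + L) - pcF q1 q2 a := by
  unfold pcF
  rw [List.take_add, List.sum_append]
  ring

theorem pc_small (q1 q2 : List Int) (k : Nat) (hk : k ≤ (q1 ++ q2).length) :
    pcF q1 q2 k = ((q1 ++ q2).take k).sum := by
  unfold pcF
  rw [List.take_append]
  have h0 : k - (q1 ++ q2).length = 0 := by omega
  rw [h0]
  simp

theorem pc_big (q1 q2 : List Int) (k : Nat) (hk : k ≤ (q1 ++ q2).length) :
    pcF q1 q2 ((q1 ++ q2).length + k) = (q1 ++ q2).sum + pcF q1 q2 k := by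
  have h1 : pcF q1 q2 ((q1 ++ q2).length + k) = (q1 ++ q2).sum + ((q1 ++ q2).take k).sum := by
    unfold pcF
    rw [List.take_append, List.take_of_length_le (Nat.le_add_right _ _),
      Nat.add_sub_cancel_left, List.sum_append]
  rw [h1, pc_small q1 q2 k hk]

theorem win_sum (q1 q2 : List Int) (i L : Nat) :
    (winL q1 q2 i L).sum = pcF q1 q2 (i % (q1 ++ q2).length + L) - pcF q1 q2 (i % (q1 ++ q2).length) := by
  unfold winL
  exact pc_take_add q1 q2 _ L

theorem win_mod_shift (q1 q2 : List Int) (i L : Nat) :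
    winL q1 q2 (i + (q1 ++ q2).length) L = winL q1 q2 i L := by
  unfold winL
  rw [Nat.add_mod_right]

-- complementary windows sum to the total
theorem win_compl_sum (q1 q2 : List Int) (i L : Nat) (hL : L ≤ (q1 ++ q2).length)
    (hn : 0 < (q1 ++ q2).length) :
    (winL q1 q2 i L).sum + (winL q1 q2 (i + L) ((q1 ++ q2).length - L)).sum = (q1 ++ q2).sum := by
  have ha : i % (q1 ++ q2).length < (q1 ++ q2).length := Nat.mod_lt _ hn
  have hmod : (i + L) % (q1 ++ q2).length = (i % (q1 ++ q2).length + L) % (q1 ++ q2).length := by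
    conv_lhs => rw [← Nat.mod_add_mod]
  rw [win_sum, win_sum, hmod]
  by_cases hcase : i % (q1 ++ q2).length + L < (q1 ++ q2).length
  · rw [Nat.mod_eq_of_lt hcase]
    have h1 : i % (q1 ++ q2).length + L + ((q1 ++ q2).length - L)
        = (q1 ++ q2).length + i % (q1 ++ q2).length := by omega
    rw [h1, pc_big q1 q2 (i % (q1 ++ q2).length) (by omega)]
    ring
  · obtain ⟨t, ht⟩ : ∃ t, i % (q1 ++ q2).length + L - (q1 ++ q2).length = t := ⟨_, rfl⟩
    have hx : t < (q1 ++ q2).length := by omega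
    have h2 : (i % (q1 ++ q2).length + L) % (q1 ++ q2).length = t := by
      rw [Nat.mod_eq_sub_mod (by omega), ht]
      exact Nat.mod_eq_of_lt hx
    rw [h2]
    have e1 : pcF q1 q2 (i % (q1 ++ q2).length + L) = (q1 ++ q2).sum + pcF q1 q2 t := by
      have h3 : i % (q1 ++ q2).length + L = (q1 ++ q2).length + t := by omega
      rw [h3, pc_big q1 q2 t (by omega)]
    have e2 : pcF q1 q2 (t + ((q1 ++ q2).length - L)) = pcF q1 q2 (i % (q1 ++ q2).length) := by
      congr 1
      omega
    rw [e1, e2]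
    ring

theorem winL_length (q1 q2 : List Int) (i L : Nat) (hL : L ≤ (q1 ++ q2).length)
    (hn : 0 < (q1 ++ q2).length) : (winL q1 q2 i L).length = L := by
  unfold winL
  have ha : i % (q1 ++ q2).length < (q1 ++ q2).length := Nat.mod_lt _ hn
  rw [List.length_take, List.length_drop]
  rw [len2]
  omega

theorem winL_ne_nil (q1 q2 : List Int) (i L : Nat) (h1 : 1 ≤ L)
    (hL : L ≤ (q1 ++ q2).length) (hn : 0 < (q1 ++ q2).length) : winL q1 q2 i L ≠ [] := by
  intro h
  have hlen := winL_length q1 q2 i L hL hn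
  rw [h] at hlen
  simp at hlen
  omega

theorem drop_take_mod (q1 q2 : List Int) (s L : Nat) (hs : s ≤ (q1 ++ q2).length)
    (hL : L ≤ (q1 ++ q2).length) (hn : 0 < (q1 ++ q2).length) :
    (((q1 ++ q2) ++ (q1 ++ q2)).drop s).take L
      = (((q1 ++ q2) ++ (q1 ++ q2)).drop (s % (q1 ++ q2).length)).take L := by
  rcases Nat.lt_or_ge s (q1 ++ q2).length with h | h
  · rw [Nat.mod_eq_of_lt h]
  · have hs' : s = (q1 ++ q2).length := by omega
    subst hs'
    rw [Nat.mod_self, List.drop_zero, List.drop_append_of_le_length (le_refl _),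
      List.drop_length, List.nil_append]
    conv_rhs => rw [List.take_append]
    have h0 : L - (q1 ++ q2).length = 0 := by omega
    rw [h0]
    simp

theorem winL_cons (q1 q2 : List Int) (i L : Nat) (h1 : 1 ≤ L)
    (hL : L ≤ (q1 ++ q2).length) (hn : 0 < (q1 ++ q2).length) :
    winL q1 q2 i L = ((q1 ++ q2) ++ (q1 ++ q2)).getD (i % (q1 ++ q2).length) 0
      :: winL q1 q2 (i + 1) (L - 1) := by
  have ha : i % (q1 ++ q2).length < (q1 ++ q2).length := Nat.mod_lt _ hn
  have hlen : i % (q1 ++ q2).length < ((q1 ++ q2) ++ (q1 ++ q2)).length := by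
    rw [len2]; omega
  unfold winL
  rw [List.drop_eq_getElem_cons hlen]
  obtain ⟨M, hM⟩ : ∃ M, L - 1 = M := ⟨_, rfl⟩
  have hLsucc : L = M + 1 := by omega
  rw [hM, hLsucc, List.take_succ_cons]
  congr 1
  · rw [List.getD_eq_getElem?_getD, List.getElem?_eq_getElem hlen]
    rfl
  · have hmod : (i + 1) % (q1 ++ q2).length = (i % (q1 ++ q2).length + 1) % (q1 ++ q2).length := by
      conv_lhs => rw [← Nat.mod_add_mod]
    rw [hmod, ← drop_take_mod q1 q2 (i % (q1 ++ q2).length + 1) M (by omega) (by omega) hn]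

theorem winL_snoc (q1 q2 : List Int) (i L : Nat) (hL : L + 1 ≤ (q1 ++ q2).length)
    (hn : 0 < (q1 ++ q2).length) :
    winL q1 q2 i (L + 1) = winL q1 q2 i L ++
      [((q1 ++ q2) ++ (q1 ++ q2)).getD ((i + L) % (q1 ++ q2).length) 0] := by
  have ha : i % (q1 ++ q2).length < (q1 ++ q2).length := Nat.mod_lt _ hn
  unfold winL
  rw [List.take_succ]
  congr 1
  have hidx : i % (q1 ++ q2).length + L < ((q1 ++ q2) ++ (q1 ++ q2)).length := by
    rw [len2]; omega
  rw [List.getElem?_drop, List.getElem?_eq_getElem hidx]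
  simp only [Option.toList_some]
  have hmod : (i + L) % (q1 ++ q2).length = (i % (q1 ++ q2).length + L) % (q1 ++ q2).length := by
    conv_lhs => rw [← Nat.mod_add_mod]
  congr 1
  rw [List.getD_eq_getElem?_getD, hmod]
  rcases Nat.lt_or_ge (i % (q1 ++ q2).length + L) (q1 ++ q2).length with h | h
  · rw [Nat.mod_eq_of_lt h, List.getElem?_eq_getElem hidx]
    rfl
  · obtain ⟨t, ht⟩ : ∃ t, i % (q1 ++ q2).length + L - (q1 ++ q2).length = t := ⟨_, rfl⟩
    have hx : t < (q1 ++ q2).length := by omega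
    have h2 : (i % (q1 ++ q2).length + L) % (q1 ++ q2).length = t := by
      rw [Nat.mod_eq_sub_mod (by omega), ht]
      exact Nat.mod_eq_of_lt hx
    rw [h2]
    have hidx2 : t < ((q1 ++ q2) ++ (q1 ++ q2)).length := by
      rw [len2]; omega
    rw [List.getElem?_eq_getElem hidx2]
    simp only [Option.getD_some]
    have e1 : ((q1 ++ q2) ++ (q1 ++ q2))[i % (q1 ++ q2).length + L]'hidx =
        (q1 ++ q2)[t]'(by omega) := by
      rw [List.getElem_append_right (by omega)]
      simp only [ht]
    have e2 : ((q1 ++ q2) ++ (q1 ++ q2))[t]'hidx2 = (q1 ++ q2)[t]'(by omega) := by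
      rw [List.getElem_append_left (by omega)]
    rw [e1, e2]

-- ---- transitions between window states ----
theorem E_child1 (q1 q2 : List Int) (i j : Nat) (hij : i < j) (hj : j ≤ i + (q1 ++ q2).length)
    (hn : 0 < (q1 ++ q2).length) :
    child1 (stE q1 q2 i j) = stE q1 q2 (i + 1) j := by
  unfold stE
  rw [winL_cons q1 q2 i (j - i) (by omega) (by omega) hn]
  have e : child1 (((q1 ++ q2) ++ (q1 ++ q2)).getD (i % (q1 ++ q2).length) 0
        :: winL q1 q2 (i + 1) (j - i - 1), winL q1 q2 j ((i + (q1 ++ q2).length) - j))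
      = (winL q1 q2 (i + 1) (j - i - 1), winL q1 q2 j ((i + (q1 ++ q2).length) - j)
          ++ [((q1 ++ q2) ++ (q1 ++ q2)).getD (i % (q1 ++ q2).length) 0]) := rfl
  rw [e]
  have h1 : j - i - 1 = j - (i + 1) := by omega
  have h2 : (i + 1 + (q1 ++ q2).length) - j = ((i + (q1 ++ q2).length) - j) + 1 := by omega
  have h3 : winL q1 q2 j (((i + (q1 ++ q2).length) - j) + 1)
      = winL q1 q2 j ((i + (q1 ++ q2).length) - j)
          ++ [((q1 ++ q2) ++ (q1 ++ q2)).getD ((j + ((i + (q1 ++ q2).length) - j)) % (q1 ++ q2).length) 0] :=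
    winL_snoc q1 q2 j _ (by omega) hn
  have h4 : j + ((i + (q1 ++ q2).length) - j) = i + (q1 ++ q2).length := by omega
  rw [h1, h2, h3, h4, Nat.add_mod_right]

theorem E_child2 (q1 q2 : List Int) (i j : Nat) (hij : i ≤ j) (hj : j < i + (q1 ++ q2).length)
    (hn : 0 < (q1 ++ q2).length) :
    child2 (stE q1 q2 i j) = stE q1 q2 (j + 1) (i + (q1 ++ q2).length) := by
  unfold stE
  rw [winL_cons q1 q2 j ((i + (q1 ++ q2).length) - j) (by omega) (by omega) hn]
  have e : child2 (winL q1 q2 i (j - i), ((q1 ++ q2) ++ (q1 ++ q2)).getD (j % (q1 ++ q2).length) 0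
        :: winL q1 q2 (j + 1) ((i + (q1 ++ q2).length) - j - 1))
      = (winL q1 q2 (j + 1) ((i + (q1 ++ q2).length) - j - 1),
          winL q1 q2 i (j - i) ++ [((q1 ++ q2) ++ (q1 ++ q2)).getD (j % (q1 ++ q2).length) 0]) := rfl
  rw [e]
  have h1 : (i + (q1 ++ q2).length) - j - 1 = (i + (q1 ++ q2).length) - (j + 1) := by omega
  have h2 : (j + 1 + (q1 ++ q2).length) - (i + (q1 ++ q2).length) = (j - i) + 1 := by omega
  have h3 : winL q1 q2 (i + (q1 ++ q2).length) ((j - i) + 1)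
      = winL q1 q2 i ((j - i) + 1) := win_mod_shift q1 q2 i _
  have h4 : winL q1 q2 i ((j - i) + 1) = winL q1 q2 i (j - i)
      ++ [((q1 ++ q2) ++ (q1 ++ q2)).getD ((i + (j - i)) % (q1 ++ q2).length) 0] :=
    winL_snoc q1 q2 i _ (by omega) hn
  have h5 : i + (j - i) = j := by omega
  rw [h1, h2, h3, h4, h5]

theorem stA_child1 (q1 q2 : List Int) (p q : Nat) (h1 : p < q1.length + q)
    (h2 : q ≤ q2.length + p) (hn : 0 < (q1 ++ q2).length) :
    child1 (stA q1 q2 p q) = stA q1 q2 (p + 1) q := by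
  unfold stA
  rw [E_child1 q1 q2 p (q1.length + q) h1 (by rw [List.length_append]; omega) hn]

theorem stA_child2 (q1 q2 : List Int) (p q : Nat) (h1 : p ≤ q1.length + q)
    (h2 : q < q2.length + p) (hn : 0 < (q1 ++ q2).length) :
    child2 (stA q1 q2 p q) = stB q1 q2 p (q + 1) := by
  unfold stA stB
  rw [E_child2 q1 q2 p (q1.length + q) h1 (by rw [List.length_append]; omega) hn]
  have h3 : q1.length + q + 1 = q1.length + (q + 1) := by omega
  rw [h3]

theorem stB_child1 (q1 q2 : List Int) (p q : Nat) (h1 : q < q2.length + p)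
    (h2 : p ≤ q1.length + q) (hn : 0 < (q1 ++ q2).length) :
    child1 (stB q1 q2 p q) = stB q1 q2 p (q + 1) := by
  unfold stB
  rw [E_child1 q1 q2 (q1.length + q) (p + (q1 ++ q2).length)
    (by rw [List.length_append]; omega) (by rw [List.length_append]; omega) hn]
  have h3 : q1.length + q + 1 = q1.length + (q + 1) := by omega
  rw [h3]

theorem stE_shift (q1 q2 : List Int) (i j : Nat) (hij : i ≤ j) :
    stE q1 q2 (i + (q1 ++ q2).length) (j + (q1 ++ q2).length) = stE q1 q2 i j := by
  unfold stE
  have h1 : j + (q1 ++ q2).length - (i + (q1 ++ q2).length) = j - i := by omega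
  have h2 : (i + (q1 ++ q2).length + (q1 ++ q2).length) - (j + (q1 ++ q2).length)
      = (i + (q1 ++ q2).length) - j := by omega
  rw [h1, h2, win_mod_shift, win_mod_shift]

theorem stB_child2 (q1 q2 : List Int) (p q : Nat) (h1 : p < q1.length + q)
    (h2 : q ≤ q2.length + p) (hn : 0 < (q1 ++ q2).length) :
    child2 (stB q1 q2 p q) = stA q1 q2 (p + 1) q := by
  unfold stB stA
  rw [E_child2 q1 q2 (q1.length + q) (p + (q1 ++ q2).length)
    (by rw [List.length_append]; omega) (by rw [List.length_append]; omega) hn]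
  have h3 : p + (q1 ++ q2).length + 1 = (p + 1) + (q1 ++ q2).length := by omega
  have h4 : q1.length + q + (q1 ++ q2).length = (q1.length + q) + (q1 ++ q2).length := rfl
  rw [h3, h4, stE_shift q1 q2 (p + 1) (q1.length + q) (by omega)]

theorem stA_zero (q1 q2 : List Int) (hn : 0 < (q1 ++ q2).length) :
    stA q1 q2 0 0 = (q1, q2) := by
  unfold stA stE
  have h1 : q1.length + 0 - 0 = q1.length := by omega
  have h2 : (0 + (q1 ++ q2).length) - (q1.length + 0) = q2.length := by
    rw [List.length_append]; omega
  rw [h1, h2]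
  refine Prod.ext ?_ ?_ <;> dsimp only
  · unfold winL
    rw [Nat.zero_mod, List.drop_zero, List.append_assoc]
    exact List.take_left
  · have h0 : q1.length + 0 = q1.length := by omega
    rw [h0]
    unfold winL
    rcases Nat.lt_or_ge q1.length (q1 ++ q2).length with h | h
    · rw [Nat.mod_eq_of_lt h, List.append_assoc, List.drop_left, List.take_left]
    · have hq2 : q2 = [] := by
        rw [List.length_append] at h
        have : q2.length = 0 := by omega
        exact List.length_eq_zero_iff.mp this
      subst hq2
      simp

theorem good_stA_iff (q1 q2 : List Int) (p q : Nat) (h1 : p ≤ q1.length + q)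
    (h2 : q ≤ q2.length + p) (hn : 0 < (q1 ++ q2).length) :
    ((stA q1 q2 p q).1.sum = (stA q1 q2 p q).2.sum) ↔ hitP q1 q2 p q := by
  unfold stA stE hitP
  dsimp only
  have hL : q1.length + q - p ≤ (q1 ++ q2).length := by rw [List.length_append]; omega
  have hc := win_compl_sum q1 q2 p (q1.length + q - p) hL hn
  have h3 : p + (q1.length + q - p) = q1.length + q := by omega
  have h4 : (q1 ++ q2).length - (q1.length + q - p) = (p + (q1 ++ q2).length) - (q1.length + q) := by
    rw [List.length_append] at *; omega
  rw [h3, h4] at hc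
  constructor
  · intro h; omega
  · intro h; omega

theorem good_stB_iff (q1 q2 : List Int) (p q : Nat) (h1 : p ≤ q1.length + q)
    (h2 : q ≤ q2.length + p) (hn : 0 < (q1 ++ q2).length) :
    ((stB q1 q2 p q).1.sum = (stB q1 q2 p q).2.sum) ↔ hitP q1 q2 p q := by
  unfold stB stE hitP
  dsimp only
  have hL : q1.length + q - p ≤ (q1 ++ q2).length := by rw [List.length_append]; omega
  have hc := win_compl_sum q1 q2 p (q1.length + q - p) hL hn
  have h3 : p + (q1.length + q - p) = q1.length + q := by omega
  have h4 : (q1 ++ q2).length - (q1.length + q - p) = (p + (q1 ++ q2).length) - (q1.length + q) := by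
    rw [List.length_append] at *; omega
  rw [h3, h4] at hc
  have h5 : winL q1 q2 (p + (q1 ++ q2).length) ((q1.length + q + (q1 ++ q2).length) - (p + (q1 ++ q2).length))
      = winL q1 q2 p (q1.length + q - p) := by
    have h6 : (q1.length + q + (q1 ++ q2).length) - (p + (q1 ++ q2).length) = q1.length + q - p := by
      omega
    rw [h6, win_mod_shift]
  rw [h5]
  constructor
  · intro h; omega
  · intro h; omega

-- ---- membership and shape of BFS levels ----
theorem mem_level_child1 (q1 q2 : List Int) (s : List Int × List Int) (c : Nat)
    (h : s ∈ levelL q1 q2 c) : child1 s ∈ levelL q1 q2 (c + 1) := by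
  show child1 s ∈ (levelL q1 q2 c).flatMap (fun s => [child1 s, child2 s])
  exact List.mem_flatMap.mpr ⟨s, h, by simp⟩

theorem mem_level_child2 (q1 q2 : List Int) (s : List Int × List Int) (c : Nat)
    (h : s ∈ levelL q1 q2 c) : child2 s ∈ levelL q1 q2 (c + 1) := by
  show child2 s ∈ (levelL q1 q2 c).flatMap (fun s => [child1 s, child2 s])
  exact List.mem_flatMap.mpr ⟨s, h, by simp⟩

theorem memA0 (q1 q2 : List Int) (hn : 0 < (q1 ++ q2).length) :
    ∀ p, p ≤ q1.length → stA q1 q2 p 0 ∈ levelL q1 q2 p := by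
  intro p
  induction p with
  | zero =>
    intro _
    rw [stA_zero q1 q2 hn]
    show (q1, q2) ∈ [(q1, q2)]
    simp
  | succ p ih =>
    intro hp
    rw [← stA_child1 q1 q2 p 0 (by omega) (by omega) hn]
    exact mem_level_child1 q1 q2 _ p (ih (by omega))

theorem memB (q1 q2 : List Int) (hn : 0 < (q1 ++ q2).length) (p : Nat)
    (hpn : p ≤ q1.length) (hnp : 0 < q2.length + p) :
    ∀ q, 1 ≤ q → q ≤ q2.length + p → stB q1 q2 p q ∈ levelL q1 q2 (p + q) := by
  intro q
  induction q with
  | zero => intro h; omega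
  | succ q ih =>
    intro _ hq
    rcases Nat.eq_zero_or_pos q with rfl | hq1
    · rw [← stA_child2 q1 q2 p 0 (by omega) (by omega) hn]
      exact mem_level_child2 q1 q2 _ p (memA0 q1 q2 hn p hpn)
    · rw [← stB_child1 q1 q2 p q (by omega) (by omega) hn]
      have := mem_level_child1 q1 q2 _ (p + q) (ih hq1 (by omega))
      have he : p + q + 1 = p + (q + 1) := by omega
      rwa [he] at this

-- every state of level c (c small enough) is a window state
theorem level_shape (q1 q2 : List Int) : ∀ c, c ≤ q2.length → c < q1.length →
    ∀ s ∈ levelL q1 q2 c, ∃ p q, p + q = c ∧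
      ((s = stA q1 q2 p q ∧ (1 ≤ p ∨ q = 0)) ∨ (s = stB q1 q2 p q ∧ 1 ≤ q)) := by
  intro c
  induction c with
  | zero =>
    intro _ hc1 s hs
    have hn : 0 < (q1 ++ q2).length := by rw [List.length_append]; omega
    refine ⟨0, 0, rfl, Or.inl ⟨?_, Or.inr rfl⟩⟩
    rw [stA_zero q1 q2 hn]
    simpa [levelL] using hs
  | succ c ih =>
    intro hc2 hc1 s hs
    have hn : 0 < (q1 ++ q2).length := by rw [List.length_append]; omega
    obtain ⟨s', hs', hch⟩ := List.mem_flatMap.mp hs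
    obtain ⟨p, q, hpq, hshape⟩ := ih (by omega) (by omega) s' hs'
    have hch' : s = child1 s' ∨ s = child2 s' := by simpa using hch
    rcases hshape with ⟨rfl, hor⟩ | ⟨rfl, hq1⟩
    · rcases hch' with rfl | rfl
      · rw [stA_child1 q1 q2 p q (by omega) (by omega) hn]
        exact ⟨p + 1, q, by omega, Or.inl ⟨rfl, Or.inl (by omega)⟩⟩
      · rw [stA_child2 q1 q2 p q (by omega) (by omega) hn]
        exact ⟨p, q + 1, by omega, Or.inr ⟨rfl, by omega⟩⟩
    · rcases hch' with rfl | rfl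
      · rw [stB_child1 q1 q2 p q (by omega) (by omega) hn]
        exact ⟨p, q + 1, by omega, Or.inr ⟨rfl, by omega⟩⟩
      · rw [stB_child2 q1 q2 p q (by omega) (by omega) hn]
        exact ⟨p + 1, q, by omega, Or.inl ⟨rfl, Or.inl (by omega)⟩⟩

-- ---- the first-child subtree of the root (for the d = len(queue2)+1 boundary) ----
def levelF (l : List (List Int × List Int)) : Nat → List (List Int × List Int)
  | 0 => l
  | k + 1 => (levelF l k).flatMap (fun s => [child1 s, child2 s])

theorem levelF_append (l1 l2 : List (List Int × List Int)) :
    ∀ k, levelF (l1 ++ l2) k = levelF l1 k ++ levelF l2 k := by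
  intro k
  induction k with
  | zero => rfl
  | succ k ih => show (levelF (l1 ++ l2) k).flatMap _ = _; rw [ih, List.flatMap_append]; rfl

theorem levelL_eq_levelF (q1 q2 : List Int) : ∀ c, levelL q1 q2 c = levelF [(q1, q2)] c := by
  intro c
  induction c with
  | zero => rfl
  | succ c ih => show (levelL q1 q2 c).flatMap _ = (levelF [(q1, q2)] c).flatMap _; rw [ih]

theorem levelF_comm (l : List (List Int × List Int)) :
    ∀ k, levelF l (k + 1) = levelF (l.flatMap (fun s => [child1 s, child2 s])) k := by
  intro k
  induction k with
  | zero => rfl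
  | succ k ih =>
    show (levelF l (k + 1)).flatMap _ = (levelF (l.flatMap _) k).flatMap _
    rw [ih]

theorem level_split (q1 q2 : List Int) (c : Nat) :
    levelL q1 q2 (c + 1) = levelF [child1 (q1, q2)] c ++ levelF [child2 (q1, q2)] c := by
  rw [levelL_eq_levelF, levelF_comm]
  have h : ([(q1, q2)].flatMap (fun s => [child1 s, child2 s]))
      = [child1 (q1, q2)] ++ [child2 (q1, q2)] := by simp
  rw [h, levelF_append]

theorem mem_levelF_child1 (l : List (List Int × List Int)) (s : List Int × List Int) (k : Nat)
    (h : s ∈ levelF l k) : child1 s ∈ levelF l (k + 1) := by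
  show child1 s ∈ (levelF l k).flatMap (fun s => [child1 s, child2 s])
  exact List.mem_flatMap.mpr ⟨s, h, by simp⟩

theorem mem_levelF_child2 (l : List (List Int × List Int)) (s : List Int × List Int) (k : Nat)
    (h : s ∈ levelF l k) : child2 s ∈ levelF l (k + 1) := by
  show child2 s ∈ (levelF l k).flatMap (fun s => [child1 s, child2 s])
  exact List.mem_flatMap.mpr ⟨s, h, by simp⟩

theorem child1_init (q1 q2 : List Int) (hn1 : 0 < q1.length) :
    child1 (q1, q2) = stA q1 q2 1 0 := by
  have hn : 0 < (q1 ++ q2).length := by rw [List.length_append]; omega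
  have h := stA_child1 q1 q2 0 0 (by omega) (by omega) hn
  rw [stA_zero q1 q2 hn] at h
  exact h

theorem shapeF1 (q1 q2 : List Int) : ∀ k, k + 1 ≤ q2.length + 1 → k + 1 < q1.length + 1 →
    0 < q1.length →
    ∀ s ∈ levelF [child1 (q1, q2)] k, ∃ p q, p + q = k + 1 ∧ 1 ≤ p ∧
      (s = stA q1 q2 p q ∨ s = stB q1 q2 p q) := by
  intro k
  induction k with
  | zero =>
    intro _ _ hn1 s hs
    have hs' : s = child1 (q1, q2) := by simpa [levelF] using hs
    exact ⟨1, 0, rfl, le_refl _, Or.inl (by rw [hs', child1_init q1 q2 hn1])⟩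
  | succ k ih =>
    intro hk2 hk1 hn1 s hs
    have hn : 0 < (q1 ++ q2).length := by rw [List.length_append]; omega
    obtain ⟨s', hs', hch⟩ := List.mem_flatMap.mp hs
    obtain ⟨p, q, hpq, hp1, hshape⟩ := ih (by omega) (by omega) hn1 s' hs'
    have hch' : s = child1 s' ∨ s = child2 s' := by simpa using hch
    rcases hshape with rfl | rfl
    · rcases hch' with rfl | rfl
      · rw [stA_child1 q1 q2 p q (by omega) (by omega) hn]
        exact ⟨p + 1, q, by omega, by omega, Or.inl rfl⟩
      · rw [stA_child2 q1 q2 p q (by omega) (by omega) hn]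
        exact ⟨p, q + 1, by omega, by omega, Or.inr rfl⟩
    · rcases hch' with rfl | rfl
      · rw [stB_child1 q1 q2 p q (by omega) (by omega) hn]
        exact ⟨p, q + 1, by omega, by omega, Or.inr rfl⟩
      · rw [stB_child2 q1 q2 p q (by omega) (by omega) hn]
        exact ⟨p + 1, q, by omega, by omega, Or.inl rfl⟩

theorem memF_A0 (q1 q2 : List Int) (hn1 : 0 < q1.length) :
    ∀ k, k + 1 ≤ q1.length → stA q1 q2 (k + 1) 0 ∈ levelF [child1 (q1, q2)] k := by
  have hn : 0 < (q1 ++ q2).length := by rw [List.length_append]; omega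
  intro k
  induction k with
  | zero =>
    intro _
    rw [← child1_init q1 q2 hn1]
    show child1 (q1, q2) ∈ [child1 (q1, q2)]
    simp
  | succ k ih =>
    intro hk
    rw [← stA_child1 q1 q2 (k + 1) 0 (by omega) (by omega) hn]
    exact mem_levelF_child1 _ _ k (ih (by omega))

theorem memF_B (q1 q2 : List Int) (hn1 : 0 < q1.length) (p : Nat) (hp : 1 ≤ p)
    (hpn : p ≤ q1.length) :
    ∀ q, 1 ≤ q → q ≤ q2.length + p → stB q1 q2 p q ∈ levelF [child1 (q1, q2)] (p - 1 + q) := by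
  have hn : 0 < (q1 ++ q2).length := by rw [List.length_append]; omega
  intro q
  induction q with
  | zero => intro h; omega
  | succ q ih =>
    intro _ hq
    rcases Nat.eq_zero_or_pos q with rfl | hq1
    · rw [← stA_child2 q1 q2 p 0 (by omega) (by omega) hn]
      obtain ⟨k, rfl⟩ : ∃ k, p = k + 1 := ⟨p - 1, by omega⟩
      have he : k + 1 - 1 + 1 = k + 1 := by omega
      rw [he]
      exact mem_levelF_child2 _ _ k (memF_A0 q1 q2 hn1 k hpn)
    · rw [← stB_child1 q1 q2 p q (by omega) (by omega) hn]
      have := mem_levelF_child1 _ _ (p - 1 + q) (ih hq1 (by omega))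
      have he : p - 1 + q + 1 = p - 1 + (q + 1) := by omega
      rwa [he] at this

-- ---- locating the first returning state ----
theorem exists_first {α : Type} (P : α → Prop) : ∀ l : List α, (∃ x ∈ l, P x) →
    ∃ p x t, l = p ++ x :: t ∧ (∀ y ∈ p, ¬ P y) ∧ P x := by
  intro l
  induction l with
  | nil => rintro ⟨x, hx, _⟩; simp at hx
  | cons a l ih =>
    rintro ⟨x, hx, hP⟩
    by_cases hPa : P a
    · exact ⟨[], a, l, rfl, by simp, hPa⟩
    · rcases List.mem_cons.mp hx with rfl | hx'
      · exact absurd hP hPa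
      · obtain ⟨p, y, t, rfl, hp, hy⟩ := ih ⟨x, hx', hP⟩
        refine ⟨a :: p, y, t, rfl, ?_, hy⟩
        intro z hz
        rcases List.mem_cons.mp hz with rfl | hz'
        · exact hPa
        · exact hp z hz'

def Pf (x : List Int × List Int) : Prop :=
  (child1 x).1.sum = (child1 x).2.sum ∨ (child2 x).1.sum = (child2 x).2.sum

theorem find_apply (q1 q2 : List Int) (C : Nat) (p t : List (List Int × List Int))
    (s : List Int × List Int)
    (hsplit : levelL q1 q2 C = p ++ s :: t)
    (hok : ∀ c < C, ∀ x ∈ levelL q1 q2 c, okNF x)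
    (hp : ∀ x ∈ p, okNF x) (hs1 : s.1 ≠ [])
    (hfind : (child1 s).1.sum = (child1 s).2.sum ∨
      (¬ (child1 s).1.sum = (child1 s).2.sum ∧ s.2 ≠ [] ∧
        (child2 s).1.sum = (child2 s).2.sum)) :
    ∀ f, bfsA ((2 ^ (C + 1) - 1) + f) [(q1, q2, (0 : Int))] = (C : Int) + 1 := by
  intro f
  have hplen : p.length + 1 ≤ 2 ^ C := by
    have hl := levelL_length q1 q2 C
    rw [hsplit] at hl
    simp at hl
    omega
  have h1 : (1 : Nat) ≤ 2 ^ C := Nat.one_le_two_pow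
  have hfuel : 2 ^ (C + 1) - 1 + f
      = (2 ^ C - 1) + ((p.length + 1) + (2 ^ C + f - (p.length + 1))) := by
    rw [pow_succ]; omega
  rw [hfuel, bfsA_run q1 q2 C _ hok, hsplit]
  rw [← List.append_nil ((p ++ s :: t).map (fun x => (x.1, x.2, (C : Int))))]
  exact bfsA_findLevel (C : Int) p s t [] _ hp hs1 hfind

-- a parent with an equalizing child, inside the whole level (case d ≤ len(queue2))
theorem find_mem_I (q1 q2 : List Int) (dN : Nat) (hd1 : 1 ≤ dN) (hdn1 : dN ≤ q1.length)
    (hdn2 : dN ≤ q2.length)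
    (hex : ∃ a b, a + b = dN ∧ b ≤ q2.length ∧ hitP q1 q2 a b) :
    ∃ x ∈ levelL q1 q2 (dN - 1), Pf x := by
  have hn : 0 < (q1 ++ q2).length := by rw [List.length_append]; omega
  obtain ⟨a, b, hab, hb, hhit⟩ := hex
  have ha : a ≤ q1.length := by omega
  rcases Nat.eq_zero_or_pos a with rfl | ha1
  · -- a = 0, b = dN
    rcases Nat.lt_or_ge b 2 with hb2 | hb2
    · -- b = dN = 1
      refine ⟨(q1, q2), ?_, ?_⟩
      · have : dN - 1 = 0 := by omega
        rw [this]
        show (q1, q2) ∈ [(q1, q2)]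
        simp
      · right
        have hc : child2 (q1, q2) = stB q1 q2 0 1 := by
          rw [← stA_zero q1 q2 hn]
          exact stA_child2 q1 q2 0 0 (by omega) (by omega) hn
        rw [hc, good_stB_iff q1 q2 0 1 (by omega) (by omega) hn]
        have hb1 : b = 1 := by omega
        rwa [hb1] at hhit
    · -- b = dN ≥ 2
      refine ⟨stB q1 q2 0 (b - 1), ?_, ?_⟩
      · have hm := memB q1 q2 hn 0 (by omega) (by omega) (b - 1) (by omega) (by omega)
        have he : (0 : Nat) + (b - 1) = dN - 1 := by omega
        rwa [he] at hm
      · left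
        have hc : child1 (stB q1 q2 0 (b - 1)) = stB q1 q2 0 b := by
          have := stB_child1 q1 q2 0 (b - 1) (by omega) (by omega) hn
          have he : b - 1 + 1 = b := by omega
          rwa [he] at this
        rw [hc, good_stB_iff q1 q2 0 b (by omega) (by omega) hn]
        simpa using hhit
  · -- a ≥ 1
    rcases Nat.eq_zero_or_pos b with rfl | hb1
    · -- b = 0, a = dN
      refine ⟨stA q1 q2 (a - 1) 0, ?_, ?_⟩
      · have hm := memA0 q1 q2 hn (a - 1) (by omega)
        have he : dN - 1 = a - 1 := by omega
        rw [he]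
        exact hm
      · left
        have hc : child1 (stA q1 q2 (a - 1) 0) = stA q1 q2 a 0 := by
          have := stA_child1 q1 q2 (a - 1) 0 (by omega) (by omega) hn
          have he : a - 1 + 1 = a := by omega
          rwa [he] at this
        rw [hc, good_stA_iff q1 q2 a 0 (by omega) (by omega) hn]
        simpa using hhit
    · rcases Nat.lt_or_ge b 2 with hb2 | hb2
      · -- b = 1
        refine ⟨stA q1 q2 a 0, ?_, ?_⟩
        · have hm := memA0 q1 q2 hn a ha
          have he : dN - 1 = a := by omega
          rw [he]
          exact hm
        · right
          have hc : child2 (stA q1 q2 a 0) = stB q1 q2 a 1 := by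
            exact stA_child2 q1 q2 a 0 (by omega) (by omega) hn
          rw [hc, good_stB_iff q1 q2 a 1 (by omega) (by omega) hn]
          have hb1' : b = 1 := by omega
          rwa [hb1'] at hhit
      · -- b ≥ 2
        refine ⟨stB q1 q2 a (b - 1), ?_, ?_⟩
        · have hm := memB q1 q2 hn a ha (by omega) (b - 1) (by omega) (by omega)
          have he : a + (b - 1) = dN - 1 := by omega
          rwa [he] at hm
        · left
          have hc : child1 (stB q1 q2 a (b - 1)) = stB q1 q2 a b := by
            have := stB_child1 q1 q2 a (b - 1) (by omega) (by omega) hn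
            have he : b - 1 + 1 = b := by omega
            rwa [he] at this
          rw [hc, good_stB_iff q1 q2 a b (by omega) (by omega) hn]
          simpa using hhit

-- a parent with an equalizing child, inside the first subtree (case d = len(queue2)+1)
theorem find_mem_II (q1 q2 : List Int) (dN : Nat) (hd2 : 2 ≤ dN) (hdn1 : dN ≤ q1.length)
    (heq : dN = q2.length + 1)
    (hex : ∃ a b, a + b = dN ∧ b ≤ q2.length ∧ hitP q1 q2 a b) :
    ∃ x ∈ levelF [child1 (q1, q2)] (dN - 2), Pf x := by
  have hn1 : 0 < q1.length := by omega
  have hn : 0 < (q1 ++ q2).length := by rw [List.length_append]; omega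
  obtain ⟨a, b, hab, hb, hhit⟩ := hex
  have ha : a ≤ q1.length := by omega
  have ha1 : 1 ≤ a := by omega
  rcases Nat.eq_zero_or_pos b with rfl | hb1
  · -- b = 0, a = dN
    refine ⟨stA q1 q2 (a - 1) 0, ?_, ?_⟩
    · have hm := memF_A0 q1 q2 hn1 (a - 2) (by omega)
      have he : a - 2 + 1 = a - 1 := by omega
      rw [he] at hm
      have he2 : a - 2 = dN - 2 := by omega
      rwa [he2] at hm
    · left
      have hc : child1 (stA q1 q2 (a - 1) 0) = stA q1 q2 a 0 := by
        have := stA_child1 q1 q2 (a - 1) 0 (by omega) (by omega) hn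
        have he : a - 1 + 1 = a := by omega
        rwa [he] at this
      rw [hc, good_stA_iff q1 q2 a 0 (by omega) (by omega) hn]
      simpa using hhit
  · rcases Nat.lt_or_ge b 2 with hb2 | hb2
    · -- b = 1
      refine ⟨stA q1 q2 a 0, ?_, ?_⟩
      · have hm := memF_A0 q1 q2 hn1 (a - 1) (by omega)
        have he : a - 1 + 1 = a := by omega
        rw [he] at hm
        have he2 : a - 1 = dN - 2 := by omega
        rwa [he2] at hm
      · right
        have hc : child2 (stA q1 q2 a 0) = stB q1 q2 a 1 :=
          stA_child2 q1 q2 a 0 (by omega) (by omega) hn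
        rw [hc, good_stB_iff q1 q2 a 1 (by omega) (by omega) hn]
        have hb1' : b = 1 := by omega
        rwa [hb1'] at hhit
    · -- b ≥ 2
      refine ⟨stB q1 q2 a (b - 1), ?_, ?_⟩
      · have hm := memF_B q1 q2 hn1 a ha1 ha (b - 1) (by omega) (by omega)
        have he : a - 1 + (b - 1) = dN - 2 := by omega
        rwa [he] at hm
      · left
        have hc : child1 (stB q1 q2 a (b - 1)) = stB q1 q2 a b := by
          have := stB_child1 q1 q2 a (b - 1) (by omega) (by omega) hn
          have he : b - 1 + 1 = b := by omega
          rwa [he] at this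
        rw [hc, good_stB_iff q1 q2 a b (by omega) (by omega) hn]
        simpa using hhit

theorem stA_ne_nil (q1 q2 : List Int) (p q : Nat) (h1 : p < q1.length + q)
    (h2 : q < q2.length + p) (hn : 0 < (q1 ++ q2).length) :
    (stA q1 q2 p q).1 ≠ [] ∧ (stA q1 q2 p q).2 ≠ [] := by
  unfold stA stE
  dsimp only
  constructor
  · exact winL_ne_nil q1 q2 _ _ (by omega) (by rw [List.length_append]; omega) hn
  · exact winL_ne_nil q1 q2 _ _ (by rw [List.length_append]; omega)
      (by rw [List.length_append]; omega) hn

theorem stB_ne_nil (q1 q2 : List Int) (p q : Nat) (h1 : q < q2.length + p)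
    (h2 : p < q1.length + q) (hn : 0 < (q1 ++ q2).length) :
    (stB q1 q2 p q).1 ≠ [] ∧ (stB q1 q2 p q).2 ≠ [] := by
  unfold stB stE
  dsimp only
  constructor
  · exact winL_ne_nil q1 q2 _ _ (by rw [List.length_append]; omega)
      (by rw [List.length_append]; omega) hn
  · exact winL_ne_nil q1 q2 _ _ (by rw [List.length_append]; omega)
      (by rw [List.length_append]; omega) hn

theorem level_all_nonempty (q1 q2 : List Int) (C : Nat) (hC2 : C < q2.length)
    (hC1 : C < q1.length) : ∀ x ∈ levelL q1 q2 C, x.1 ≠ [] ∧ x.2 ≠ [] := by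
  intro x hx
  have hn : 0 < (q1 ++ q2).length := by rw [List.length_append]; omega
  obtain ⟨p, q, hpq, hsh⟩ := level_shape q1 q2 C (by omega) (by omega) x hx
  rcases hsh with ⟨rfl, _⟩ | ⟨rfl, _⟩
  · exact stA_ne_nil q1 q2 p q (by omega) (by omega) hn
  · exact stB_ne_nil q1 q2 p q (by omega) (by omega) hn

theorem bfsA_returns (q1 q2 : List Int) (dN : Nat)
    (hd1 : 1 ≤ dN) (hdn1 : dN ≤ q1.length) (hdn2 : dN ≤ q2.length + 1)
    (hex : ∃ a b, a + b = dN ∧ b ≤ q2.length ∧ hitP q1 q2 a b)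
    (hmin : ∀ a b, 1 ≤ a + b → a + b < dN → b ≤ q2.length → ¬ hitP q1 q2 a b) :
    ∀ f, bfsA ((2 ^ dN - 1) + f) [(q1, q2, (0 : Int))] = (dN : Int) := by
  obtain ⟨C, rfl⟩ : ∃ C, dN = C + 1 := ⟨dN - 1, by omega⟩
  have hn1 : 0 < q1.length := by omega
  have hn : 0 < (q1 ++ q2).length := by rw [List.length_append]; omega
  have hok : ∀ c < C, ∀ s ∈ levelL q1 q2 c, okNF s := by
    intro c hc s hs
    obtain ⟨p, q, hpq, hsh⟩ := level_shape q1 q2 c (by omega) (by omega) s hs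
    rcases hsh with ⟨rfl, _⟩ | ⟨rfl, _⟩
    · obtain ⟨hne1, hne2⟩ := stA_ne_nil q1 q2 p q (by omega) (by omega) hn
      refine ⟨hne1, hne2, ?_, ?_⟩
      · rw [stA_child1 q1 q2 p q (by omega) (by omega) hn,
          good_stA_iff q1 q2 (p + 1) q (by omega) (by omega) hn]
        exact hmin (p + 1) q (by omega) (by omega) (by omega)
      · rw [stA_child2 q1 q2 p q (by omega) (by omega) hn,
          good_stB_iff q1 q2 p (q + 1) (by omega) (by omega) hn]
        exact hmin p (q + 1) (by omega) (by omega) (by omega)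
    · obtain ⟨hne1, hne2⟩ := stB_ne_nil q1 q2 p q (by omega) (by omega) hn
      refine ⟨hne1, hne2, ?_, ?_⟩
      · rw [stB_child1 q1 q2 p q (by omega) (by omega) hn,
          good_stB_iff q1 q2 p (q + 1) (by omega) (by omega) hn]
        exact hmin p (q + 1) (by omega) (by omega) (by omega)
      · rw [stB_child2 q1 q2 p q (by omega) (by omega) hn,
          good_stA_iff q1 q2 (p + 1) q (by omega) (by omega) hn]
        exact hmin (p + 1) q (by omega) (by omega) (by omega)
  intro f
  rcases Nat.eq_zero_or_pos C with rfl | hC1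
  · -- d = 1: the answer is found while processing the root
    have hfind : (child1 (q1, q2)).1.sum = (child1 (q1, q2)).2.sum ∨
        (¬ (child1 (q1, q2)).1.sum = (child1 (q1, q2)).2.sum ∧ (q1, q2).2 ≠ [] ∧
          (child2 (q1, q2)).1.sum = (child2 (q1, q2)).2.sum) := by
      obtain ⟨a, b, hab, hb, hhit⟩ := hex
      by_cases hg1 : (child1 (q1, q2)).1.sum = (child1 (q1, q2)).2.sum
      · exact Or.inl hg1
      · right
        have hab' : (a = 1 ∧ b = 0) ∨ (a = 0 ∧ b = 1) := by omega
        rcases hab' with ⟨rfl, rfl⟩ | ⟨rfl, rfl⟩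
        · exfalso
          apply hg1
          rw [child1_init q1 q2 hn1, good_stA_iff q1 q2 1 0 (by omega) (by omega) hn]
          exact hhit
        · refine ⟨hg1, ?_, ?_⟩
          · intro hq2
            have hq2' : q2 = [] := hq2
            rw [hq2'] at hb
            simp at hb
          · have hc : child2 (q1, q2) = stB q1 q2 0 1 := by
              have := stA_child2 q1 q2 0 0 (by omega) (by omega) hn
              rwa [stA_zero q1 q2 hn] at this
            rw [hc, good_stB_iff q1 q2 0 1 (by omega) (by omega) hn]
            exact hhit
    have hres := find_apply q1 q2 0 [] [] (q1, q2) rfl hok (by simp)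
      (by
        intro h
        have h' : q1 = [] := h
        rw [h'] at hn1
        simp at hn1) hfind f
    rw [hres]
    norm_num
  · rcases Nat.lt_or_ge C q2.length with hcase | hcase
    · -- d ≤ len(queue2): the whole level before the answer is well-formed
      have hne := level_all_nonempty q1 q2 C hcase (by omega)
      obtain ⟨x, hx, hPf⟩ := find_mem_I q1 q2 (C + 1) (by omega) hdn1 (by omega) hex
      obtain ⟨p, s, t, hsplit, hpnot, hPs⟩ := exists_first Pf (levelL q1 q2 C) ⟨x, hx, hPf⟩
      have hmem : ∀ y ∈ p, y ∈ levelL q1 q2 C := by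
        intro y hy; rw [hsplit]; exact List.mem_append_left _ hy
      have hsmem : s ∈ levelL q1 q2 C := by
        rw [hsplit]; exact List.mem_append_right _ (by simp)
      have hres := find_apply q1 q2 C p t s hsplit hok
        (fun y hy => ⟨(hne y (hmem y hy)).1, (hne y (hmem y hy)).2,
          fun hg => hpnot y hy (Or.inl hg), fun hg => hpnot y hy (Or.inr hg)⟩)
        ((hne s hsmem).1)
        (by
          by_cases hg1 : (child1 s).1.sum = (child1 s).2.sum
          · exact Or.inl hg1
          · rcases hPs with hg | hg
            · exact absurd hg hg1
            · exact Or.inr ⟨hg1, (hne s hsmem).2, hg⟩) f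
      rw [hres]
      push_cast
      ring
    · -- d = len(queue2) + 1: the answer is found inside the first-child subtree
      have hCeq : C = q2.length := by omega
      obtain ⟨x, hx, hPf⟩ := find_mem_II q1 q2 (C + 1) (by omega) hdn1 (by omega) hex
      have hidx : C + 1 - 2 = C - 1 := by omega
      rw [hidx] at hx
      have hshape := shapeF1 q1 q2 (C - 1) (by omega) (by omega) hn1
      have hneF : ∀ y ∈ levelF [child1 (q1, q2)] (C - 1), y.1 ≠ [] ∧ y.2 ≠ [] := by
        intro y hy
        obtain ⟨p, q, hpq, hp1, hsh⟩ := hshape y hy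
        have he : C - 1 + 1 = C := by omega
        rw [he] at hpq
        rcases hsh with rfl | rfl
        · exact stA_ne_nil q1 q2 p q (by omega) (by omega) hn
        · exact stB_ne_nil q1 q2 p q (by omega) (by omega) hn
      obtain ⟨p, s, t, hsplit1, hpnot, hPs⟩ :=
        exists_first Pf (levelF [child1 (q1, q2)] (C - 1)) ⟨x, hx, hPf⟩
      have hsplit : levelL q1 q2 C = p ++ s :: (t ++ levelF [child2 (q1, q2)] (C - 1)) := by
        have hs := level_split q1 q2 (C - 1)
        have he : C - 1 + 1 = C := by omega
        rw [he] at hs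
        rw [hs, hsplit1]
        simp
      have hmem : ∀ y ∈ p, y ∈ levelF [child1 (q1, q2)] (C - 1) := by
        intro y hy; rw [hsplit1]; exact List.mem_append_left _ hy
      have hsmem : s ∈ levelF [child1 (q1, q2)] (C - 1) := by
        rw [hsplit1]; exact List.mem_append_right _ (by simp)
      have hres := find_apply q1 q2 C p (t ++ levelF [child2 (q1, q2)] (C - 1)) s hsplit hok
        (fun y hy => ⟨(hneF y (hmem y hy)).1, (hneF y (hmem y hy)).2,
          fun hg => hpnot y hy (Or.inl hg), fun hg => hpnot y hy (Or.inr hg)⟩)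
        ((hneF s hsmem).1)
        (by
          by_cases hg1 : (child1 s).1.sum = (child1 s).2.sum
          · exact Or.inl hg1
          · rcases hPs with hg | hg
            · exact absurd hg hg1
            · exact Or.inr ⟨hg1, (hneF s hsmem).2, hg⟩) f
      rw [hres]
      push_cast
      ring

-- ---- glue: the value of A ----
theorem solution_eq_bfs (queue1 queue2 : List Int) (hfeas : feasW queue1 queue2) :
    solution queue1 queue2
      = bfsA (2 ^ (queue1.length + 1)) [(queue1, queue2, 0)] := by
  unfold solution
  apply solutionGo_hit
  obtain ⟨c, hc, hlen, hsum⟩ := hfeas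
  refine ⟨c, ?_, hsum⟩
  rw [← hlen]
  exact combinationsA_complete _ c (List.mem_sublists.mp hc)

theorem A_val (queue1 queue2 : List Int) (hfeas : feasW queue1 queue2)
    (a0 L0 : Nat) (ha0 : a0 < (queue1 ++ queue2).length) (hL0 : L0 ≤ (queue1 ++ queue2).length)
    (hhit0 : hitW queue1 queue2 a0 L0) (hc1 : 1 ≤ costW queue1.length a0 L0)
    (hcn1 : costW queue1.length a0 L0 ≤ (queue1.length : Int))
    (hcn2 : costW queue1.length a0 L0 ≤ (queue2.length : Int) + 1)
    (hminW : ∀ a' < (queue1 ++ queue2).length, ∀ L' ≤ (queue1 ++ queue2).length,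
       hitW queue1 queue2 a' L' → 1 ≤ costW queue1.length a' L' →
       costW queue1.length a0 L0 ≤ costW queue1.length a' L') :
    solution queue1 queue2 = costW queue1.length a0 L0 := by
  have hna : (queue1 ++ queue2).length = queue1.length + queue2.length := List.length_append
  have hge0 : queue1.length ≤ a0 + L0 := hhit0.1
  obtain ⟨dN, hdN⟩ : ∃ d : Nat, costW queue1.length a0 L0 = (d : Int) :=
    ⟨2 * a0 + L0 - queue1.length, by unfold costW; omega⟩
  have hd1 : 1 ≤ dN := by omega
  have hdn1 : dN ≤ queue1.length := by omega
  have hdn2 : dN ≤ queue2.length + 1 := by omega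
  have hdval : dN = 2 * a0 + L0 - queue1.length := by unfold costW at hdN; omega
  have hex : ∃ a b, a + b = dN ∧ b ≤ queue2.length ∧ hitP queue1 queue2 a b := by
    refine ⟨a0, dN - a0, by omega, by omega, ?_⟩
    unfold hitP
    have hLb : queue1.length + (dN - a0) - a0 = L0 := by omega
    rw [hLb]
    unfold winL
    rw [Nat.mod_eq_of_lt ha0]
    have h02 := hhit0.2
    rw [winR_eq_winS queue1 queue2 a0 L0 ha0 hL0] at h02
    unfold winS at h02
    exact h02
  have hmin : ∀ a b, 1 ≤ a + b → a + b < dN → b ≤ queue2.length →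
      ¬ hitP queue1 queue2 a b := by
    intro a b h1 h2 hb habs
    unfold hitP at habs
    have haL : a < (queue1 ++ queue2).length := by omega
    have hLn : queue1.length + b - a ≤ (queue1 ++ queue2).length := by omega
    unfold winL at habs
    rw [Nat.mod_eq_of_lt haL] at habs
    have hw : hitW queue1 queue2 a (queue1.length + b - a) := by
      refine ⟨by omega, ?_⟩
      rw [winR_eq_winS queue1 queue2 a _ haL hLn]
      unfold winS
      exact habs
    have hle := hminW a haL (queue1.length + b - a) hLn hw (by unfold costW; omega)
    unfold costW at hle hdN
    omega
  have hA := bfsA_returns queue1 queue2 dN hd1 hdn1 hdn2 hex hmin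
    (2 ^ (queue1.length + 1) - (2 ^ dN - 1))
  have hpow : (2:Nat) ^ dN ≤ 2 ^ queue1.length := Nat.pow_le_pow_right (by omega) hdn1
  have hpow2 : (2:Nat) ^ (queue1.length + 1) = 2 * 2 ^ queue1.length := by rw [pow_succ]; ring
  have h1 : (1:Nat) ≤ 2 ^ dN := Nat.one_le_two_pow
  have hfuel : (2 ^ dN - 1) + (2 ^ (queue1.length + 1) - (2 ^ dN - 1))
      = 2 ^ (queue1.length + 1) := by omega
  rw [hfuel] at hA
  rw [solution_eq_bfs queue1 queue2 hfeas, hA, hdN]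

-- ---- glue: the value of B ----
theorem altCost_eq_costW (n1 a L : Nat) : altCost n1 a L = costW n1 a L := rfl

theorem B_members (queue1 queue2 : List Int) (v : Int)
    (hv : v ∈ allHits ((queue1 ++ queue2) ++ (queue1 ++ queue2) ++ (queue1 ++ queue2))
      (PySem.Int.floordiv (queue1.sum + queue2.sum) 2) queue1.length
      ((queue1 ++ queue2).length) (2 * (queue1 ++ queue2).length))
    (hmod : PySem.Int.mod (queue1.sum + queue2.sum) 2 = 0) :
    (∃ a < (queue1 ++ queue2).length, ∃ L ≤ (queue1 ++ queue2).length,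
        2 * winR queue1 queue2 a L = (queue1 ++ queue2).sum) ∧ 0 ≤ v ∧
      ((∃ a < (queue1 ++ queue2).length, ∃ L ≤ (queue1 ++ queue2).length,
          hitW queue1 queue2 a L ∧ v = costW queue1.length a L) ∨
        (queue1.length : Int) + 2 * (queue2.length : Int) ≤ v) := by
  have hS : (queue1 ++ queue2).sum = queue1.sum + queue2.sum := by simp
  have heven := total_eq_two_half (queue1.sum + queue2.sum) hmod
  have hna : (queue1 ++ queue2).length = queue1.length + queue2.length := List.length_append
  obtain ⟨a, ha, L, hL, ⟨hge, hsum⟩, rfl⟩ := (mem_allHits _ _ _ _ _ _).mp hv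
  rcases Nat.lt_or_ge a (queue1 ++ queue2).length with hlt | hge2
  · have hwin : 2 * winR queue1 queue2 a L = (queue1 ++ queue2).sum := by
      rw [winR_eq_winS queue1 queue2 a L hlt hL]
      unfold winS
      rw [← ext_window_lo (queue1 ++ queue2) a L (by omega)]
      rw [hsum, hS, ← heven]
    exact ⟨⟨a, hlt, L, hL, hwin⟩, altCost_nonneg _ _ _ hge,
      Or.inl ⟨a, hlt, L, hL, ⟨hge, hwin⟩, (altCost_eq_costW _ _ _)⟩⟩
  · obtain ⟨a', rfl⟩ : ∃ a', a = (queue1 ++ queue2).length + a' :=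
      ⟨a - (queue1 ++ queue2).length, by omega⟩
    have ha' : a' < (queue1 ++ queue2).length := by omega
    have hwin : 2 * winR queue1 queue2 a' L = (queue1 ++ queue2).sum := by
      rw [winR_eq_winS queue1 queue2 a' L ha' hL]
      unfold winS
      rw [← ext_window_hi (queue1 ++ queue2) a']
      rw [hsum, hS, ← heven]
    refine ⟨⟨a', ha', L, hL, hwin⟩, altCost_nonneg _ _ _ hge, Or.inr ?_⟩
    unfold altCost
    omega

theorem B_val (queue1 queue2 : List Int) (d : Int)
    (hmod : PySem.Int.mod (queue1.sum + queue2.sum) 2 = 0)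
    (hmem : d ∈ allHits ((queue1 ++ queue2) ++ (queue1 ++ queue2) ++ (queue1 ++ queue2))
      (PySem.Int.floordiv (queue1.sum + queue2.sum) 2) queue1.length
      ((queue1 ++ queue2).length) (2 * (queue1 ++ queue2).length))
    (hlow : ∀ v ∈ allHits ((queue1 ++ queue2) ++ (queue1 ++ queue2) ++ (queue1 ++ queue2))
      (PySem.Int.floordiv (queue1.sum + queue2.sum) 2) queue1.length
      ((queue1 ++ queue2).length) (2 * (queue1 ++ queue2).length), d ≤ v) :
    solution_alt queue1 queue2 = d := by
  rw [solution_alt_eq_fold queue1 queue2 hmod]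
  rcases fold_minUpd_spec _ (allHits_nonneg _ _ _ _ _) with ⟨hres, hnil⟩ | ⟨hm, hle⟩
  · rw [hnil] at hmem
    simp at hmem
  · have h1 := hle d hmem
    have h2 := hlow _ hm
    omega

theorem B_neg_one (queue1 queue2 : List Int)
    (hcand : ¬ ∃ a < (queue1 ++ queue2).length, ∃ L ≤ (queue1 ++ queue2).length,
      2 * winR queue1 queue2 a L = (queue1 ++ queue2).sum) :
    solution_alt queue1 queue2 = -1 := by
  by_cases hmod : PySem.Int.mod (queue1.sum + queue2.sum) 2 = 0
  · rw [solution_alt_eq_fold queue1 queue2 hmod]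
    rcases fold_minUpd_spec _ (allHits_nonneg _ _ _ _ _) with ⟨hres, _⟩ | ⟨hm, _⟩
    · exact hres
    · exfalso
      obtain ⟨hcand2, _, _⟩ := B_members queue1 queue2 _ hm hmod
      exact hcand hcand2
  · unfold solution_alt
    rw [if_pos (by simpa using hmod)]

-- ===== VERDICT (by name: the statement is the Claim_ definition above) =====
theorem solution_spec : Claim_unchanged_solution := by
  intro queue1 queue2 hdom hpre
  unfold Spec_solution
  intro hD
  have hS : (queue1 ++ queue2).sum = queue1.sum + queue2.sum := by simp
  by_cases hfeas : feasW queue1 queue2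
  · rcases hpre with hnf | ⟨a0, ha0, L0, hL0, hhit0, hc1, hcn1, hcn2, hminW⟩
    · exact absurd hfeas hnf
    have hsums : ¬ queue1.sum = queue2.sum := fun h => hD (Or.inl h)
    rw [A_val queue1 queue2 hfeas a0 L0 ha0 hL0 hhit0 hc1 hcn1 hcn2 hminW]
    symm
    have hmod : PySem.Int.mod (queue1.sum + queue2.sum) 2 = 0 := by
      apply even_of_hit _ (winR queue1 queue2 a0 L0)
      rw [← hS]
      exact hhit0.2
    have heven := total_eq_two_half (queue1.sum + queue2.sum) hmod
    apply B_val queue1 queue2 _ hmod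
    · rw [← altCost_eq_costW]
      apply (mem_allHits _ _ _ _ _ _).mpr
      refine ⟨a0, by omega, L0, hL0, ⟨hhit0.1, ?_⟩, rfl⟩
      rw [ext_window_lo (queue1 ++ queue2) a0 L0 (by omega)]
      have h2 := hhit0.2
      rw [winR_eq_winS queue1 queue2 a0 L0 ha0 hL0] at h2
      unfold winS at h2
      omega
    · intro v hv
      obtain ⟨_, hv0, hcases⟩ := B_members queue1 queue2 v hv hmod
      rcases hcases with ⟨a, ha, L, hL, hw, rfl⟩ | hbig
      · by_cases h0 : 1 ≤ costW queue1.length a L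
        · exact hminW a ha L hL hw h0
        · exfalso
          have hge := hw.1
          have ha0' : a = 0 ∧ L = queue1.length := by
            unfold costW at h0 hv0
            constructor <;> omega
          obtain ⟨rfl, rfl⟩ := ha0'
          have hws := hw.2
          rw [winR_zero] at hws
          apply hsums
          rw [hS] at hws
          omega
      · unfold costW at hcn1 ⊢
        omega
  · rw [solution_eq_neg_one queue1 queue2 hfeas]
    symm
    apply B_neg_one
    intro hc
    exact hD (Or.inr ⟨hfeas, hc⟩)

theorem solution_changed : Claim_changed_solution := by
  unfold Claim_changed_solution; decide

theorem solution_tight : Claim_exact_solution := by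
  intro queue1 queue2 hdom hpre hD
  have hS : (queue1 ++ queue2).sum = queue1.sum + queue2.sum := by simp
  have hna : (queue1 ++ queue2).length = queue1.length + queue2.length := List.length_append
  by_cases hsums : queue1.sum = queue2.sum
  · -- A returns a positive move count, B returns 0
    have hfeas : feasW queue1 queue2 := by
      refine ⟨queue1, List.mem_sublists.mpr (List.sublist_append_left _ _), rfl, ?_⟩
      have h2 : (queue1 ++ queue2).sum = 2 * queue1.sum := by rw [hS, hsums]; ring
      rw [h2, PySem.Int.floordiv_eq_ediv_of_pos (by norm_num)]
      omega
    rcases hpre with hnf | ⟨a0, ha0, L0, hL0, hhit0, hc1, hcn1, hcn2, hminW⟩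
    · exact absurd hfeas hnf
    rw [A_val queue1 queue2 hfeas a0 L0 ha0 hL0 hhit0 hc1 hcn1 hcn2 hminW]
    have hmod : PySem.Int.mod (queue1.sum + queue2.sum) 2 = 0 := by
      apply even_of_hit _ queue1.sum
      omega
    have heven := total_eq_two_half (queue1.sum + queue2.sum) hmod
    have hn1pos : 1 ≤ queue1.length := by
      unfold costW at hc1 hcn1
      omega
    have htake : ((queue1 ++ queue2) ++ (queue1 ++ queue2) ++ (queue1 ++ queue2)).take queue1.length
        = queue1 := by
      rw [show (queue1 ++ queue2) ++ (queue1 ++ queue2) ++ (queue1 ++ queue2)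
        = queue1 ++ (queue2 ++ ((queue1 ++ queue2) ++ (queue1 ++ queue2))) by simp, List.take_left]
    have hmem0 : altCost queue1.length 0 queue1.length ∈
        allHits ((queue1 ++ queue2) ++ (queue1 ++ queue2) ++ (queue1 ++ queue2))
          (PySem.Int.floordiv (queue1.sum + queue2.sum) 2) queue1.length
          ((queue1 ++ queue2).length) (2 * (queue1 ++ queue2).length) := by
      apply (mem_allHits _ _ _ _ _ _).mpr
      refine ⟨0, by omega, queue1.length, by omega, ⟨by omega, ?_⟩, rfl⟩
      rw [List.drop_zero, htake]
      omega
    have hcost0 : altCost queue1.length 0 queue1.length = 0 := by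
      unfold altCost
      push_cast
      ring
    intro hAB
    have hBle : solution_alt queue1 queue2 ≤ 0 := by
      rw [solution_alt_eq_fold queue1 queue2 hmod]
      rcases fold_minUpd_spec _ (allHits_nonneg _ _ _ _ _) with ⟨_, hnil⟩ | ⟨_, hle⟩
      · rw [hnil] at hmem0
        simp at hmem0
      · have := hle _ hmem0
        omega
    rw [← hAB] at hBle
    unfold costW at hBle hc1
    omega
  · -- A returns -1, B returns the minimal operation count (≥ 0)
    have hD1 : (¬ feasW queue1 queue2) ∧ ∃ a < (queue1 ++ queue2).length,
        ∃ L ≤ (queue1 ++ queue2).length,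
          2 * winR queue1 queue2 a L = (queue1 ++ queue2).sum := by
      rcases hD with h | h
      · exact absurd h hsums
      · exact h
    obtain ⟨hnf, a, ha, L, hL, hwin⟩ := hD1
    rw [solution_eq_neg_one queue1 queue2 hnf]
    have hmod : PySem.Int.mod (queue1.sum + queue2.sum) 2 = 0 := by
      apply even_of_hit _ (winR queue1 queue2 a L)
      omega
    have heven := total_eq_two_half (queue1.sum + queue2.sum) hmod
    have hmem : ∃ v, v ∈ allHits ((queue1 ++ queue2) ++ (queue1 ++ queue2) ++ (queue1 ++ queue2))
        (PySem.Int.floordiv (queue1.sum + queue2.sum) 2) queue1.length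
        ((queue1 ++ queue2).length) (2 * (queue1 ++ queue2).length) := by
      rcases Nat.lt_or_ge (a + L) queue1.length with hlt | hge
      · refine ⟨_, (mem_allHits _ _ _ _ _ _).mpr
          ⟨(queue1 ++ queue2).length + a, by omega, L, hL, ⟨by omega, ?_⟩, rfl⟩⟩
        rw [ext_window_hi (queue1 ++ queue2) a]
        rw [winR_eq_winS queue1 queue2 a L ha hL] at hwin
        unfold winS at hwin
        omega
      · refine ⟨_, (mem_allHits _ _ _ _ _ _).mpr ⟨a, by omega, L, hL, ⟨hge, ?_⟩, rfl⟩⟩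
        rw [ext_window_lo (queue1 ++ queue2) a L (by omega)]
        rw [winR_eq_winS queue1 queue2 a L ha hL] at hwin
        unfold winS at hwin
        omega
    intro hAB
    obtain ⟨v, hv⟩ := hmem
    have hB : 0 ≤ solution_alt queue1 queue2 := by
      rw [solution_alt_eq_fold queue1 queue2 hmod]
      rcases fold_minUpd_spec _ (allHits_nonneg _ _ _ _ _) with ⟨_, hnil⟩ | ⟨hm, _⟩
      · rw [hnil] at hv
        simp at hv
      · exact allHits_nonneg _ _ _ _ _ _ hm
    omega
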